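/- GENERATED by tools/from_farm_form.py from prooffarm-gif/accepted/GifFreeSavedImages.2/Lemmas.lean (a worked proof of the farm's unit `GifFreeSavedImages.2`,
   accepted by the verdict) — do not edit. -/
import Gif.Spec.Units.GifFreeSavedImages_2
import Gif.Spec.AllSegs

/-!
  Lemmas for the unit `GifFreeSavedImages.2` (one round of the loop of `GifFreeSavedImages`, gifalloc.c:438-449). The round is walked
  in THREE STEPS that meet at two private cuts (107F6EH `fs2_cut2`, 107F07H `fs2_cut3`) with the private assertion `fs2_Mid`.

  §1  PURE FACTS   fs2_same_append (two footprints in a row), fs2_WinOK / fs2_WinOK2 (the windows a round may write: loose for the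
                   heap and forest AT THE HEAD, or the colour-map field / the two cells of slot `k`), fs2_arr_obj, fs2_in_arr,
                   fs2_win_miss (what such a window misses), fs2_savedAt_round (`savedAt_round` of the tree WITHOUT its demand on
                   the freed structural parts of the images done before), fs2_round_shape (THE SHAPE ONE ROUND LATER, concluded
                   once at the latch: `Shape.set_saved`), fs2_slot_head, fs2_mid_eq, fs2_ext_cells (reading slot `k` mid-round),
                   fs2_heap_round (the three `free` steps give `heapAt (k + 1)`)
  §2  THE ASSERTION INSIDE A ROUND   fs2_Mid (the head's assertion for the state the round started at, the pointers freed since,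
                   what is still live, the windows written since the head), fs2_owns_step, fs2_owns_head
  §3  THE WALKS    fs2_head_exit   107F18H … 107F87H   `k = length`                         `Head` → `AtExit`
                   fs2_head_none   107F18H … 107F6EH   no colour map                        `Head` → `fs2_Mid fs2_cut2`
                   fs2_head_some   107F18H … 107F6EH   `GifFreeMapObject`, store of NULL    `Head` → `fs2_Mid fs2_cut2`
                   fs2_raster_none 107F6EH … 107F07H   no raster                            `fs2_Mid fs2_cut2` → `fs2_Mid fs2_cut3`
                   fs2_raster_some 107F6EH … 107F07H   `free(raster)`                       `fs2_Mid fs2_cut2` → `fs2_Mid fs2_cut3`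
                   fs2_latch       107F07H … 107F18H   `GifFreeExtensions`, `sp++`          `fs2_Mid fs2_cut3` → `Head (k + 1)`
-/

open X86 X86.User Asan ProgX.Base ProgX.Base.Spec Gif.Spec Gif.Spec.GifFreeSavedImages

set_option maxRecDepth 4000
set_option maxHeartbeats 4000000

namespace Gif.Spec.GifFreeSavedImages_2

/-! ### 1. Pure facts: lists, windows, the shape one round later -/

/-- What is live behind the objects of image `k`: the objects of the later images, everything else of the forest. -/
def fs2_tail (F : Forest) (s : Saved) (k : Nat) : List (Nat × Nat) :=
  (s.imgs.drop (k + 1)).flatMap Img.objs ++ F.ownedButSaved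

/-- Two footprints, one after the other. -/
theorem fs2_same_append {ws1 ws2 : List Span} {μ ν ξ : Mem} (h1 : Mem.SameExcept ws1 μ ν) (h2 : Mem.SameExcept ws2 ν ξ) :
    Mem.SameExcept (ws1 ++ ws2) μ ξ := by
  intro a ha
  have e2 := h2 a (fun w hw => ha w (List.mem_append_right _ hw))
  have e1 := h1 a (fun w hw => ha w (List.mem_append_left _ hw))
  exact e2.trans e1

/-- **A window a round may write before the call of `GifFreeExtensions`**: loose for the heap and the forest at the head, or
inside the `ImageDesc.ColorMap` field of slot `k`. -/
def fs2_WinOK (H : Heap) (F : Forest) (R : Rd) (s : Saved) (k : Nat) (w : Span) : Prop :=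
  Loose (heapAt H s k) (forestAt F s k) R w ∨ (s.arr + 56 * k + 24 ≤ w.lo ∧ w.hi ≤ s.arr + 56 * k + 32)

/-- **A window a whole round may write**: also the two cells of slot `k`'s extension list. -/
def fs2_WinOK2 (H : Heap) (F : Forest) (R : Rd) (s : Saved) (k : Nat) (w : Span) : Prop :=
  fs2_WinOK H F R s k w ∨ (s.arr + 56 * k + 40 ≤ w.lo ∧ w.hi ≤ s.arr + 56 * k + 56)

/-- The array's object is an object of the heap (live or freed), with room for `cap` slots. -/
theorem fs2_arr_obj {Hc : Heap} {F : Forest} {s : Saved} (hp : Placed Hc F.owned) (hs : F.saved = some s) :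
    ∃ x, x ∈ Hc.objs ∧ x.base = s.arr ∧ 56 * s.cap ≤ x.cap := by
  have hin : (s.arr, 56 * s.cap) ∈ F.owned := by
    unfold Forest.owned
    rw [hs]
    simp only [Saved.objs, List.mem_cons, List.mem_append, true_or, or_true]
  obtain ⟨x, hx, k1, k2⟩ := hp.at_ _ hin
  exact ⟨x, hx, k1, k2⟩

/-- **What a window inside the capacity of the array's object misses**: gif, pv, the cursor, the constants, and every structural
window of the forest at the head that is not the array's. -/
theorem fs2_in_arr {Hc : Heap} {F : Forest} {R : Rd} {s : Saved} {k : Nat} (G : carry_Geo Hc (forestAt F s k) R)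
    {x : HObj} (hx : x ∈ Hc.objs) (hb : x.base = s.arr) {w : Span} (h1 : s.arr ≤ w.lo) (h2 : w.hi ≤ s.arr + x.cap) :
    (w.hi ≤ F.gif ∨ F.gif + 120 ≤ w.lo) ∧
    (w.hi ≤ R.cur ∨ R.cur + 16 ≤ w.lo) ∧
    (∀ o, o ∈ (imgsAt s k).flatMap Img.structs → w.hi ≤ o.1 ∨ o.1 + o.2 ≤ w.lo) := by
  have hin : (s.arr, 56 * (imgsAt s k).length) ∈ Saved.structs (forestAt F s k).saved := by
    rw [forestAt_saved]
    simp only [Saved.structs, List.mem_cons, true_or]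
  have hne := G.struct_ne _ (carry_mem_structs_saved hin)
  simp only [forestAt_gif] at hne
  obtain ⟨wg, _, wst, wc, _⟩ := G.in_obj hx (w := w) (by omega) (by omega)
  refine ⟨?_, wc, ?_⟩
  · have := wg (by
      rw [hb, forestAt_gif]
      exact hne.1)
    rw [forestAt_gif] at this
    exact this
  · intro o ho
    have hos : o ∈ Saved.structs (forestAt F s k).saved := by
      rw [forestAt_saved]
      simp only [Saved.structs, List.mem_cons]
      exact Or.inr ho
    apply wst o (carry_mem_structs_saved hos)
    rw [hb]
    intro e
    -- the array's window is the head of the list, `o` is behind it: different bases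
    have hap := G.apart
    unfold Forest.structs at hap
    obtain ⟨h1', _, _⟩ := List.pairwise_append.mp hap
    obtain ⟨_, h2', _⟩ := List.pairwise_append.mp h1'
    rw [forestAt_saved] at h2'
    simp only [Saved.structs] at h2'
    obtain ⟨h3', _⟩ := List.pairwise_cons.mp h2'
    exact h3' o ho e.symm


/-- **THE ARRAY'S SHAPE ONE ROUND LATER** (`savedAt_round` of the tree, asking nothing about the structural parts of the images
that are done already: their objects are freed, a later round may not know them). -/
theorem fs2_savedAt_round {s : Saved} {k p c : Nat} {mem mem' : Mem} (hk : k < s.imgs.length)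
    (h : SavedAt (some { s with imgs := imgsAt s k }) p c mem)
    (hslot : ∀ j, j < s.imgs.length → j ≠ k → Mem.EqOn (s.arr + 56 * j) (s.arr + 56 * j + 56) mem mem')
    (hstruct : ∀ j (hj : j < s.imgs.length), k < j → ∀ o, o ∈ Img.structs s.imgs[j] → Mem.EqOn o.1 (o.1 + o.2) mem mem')
    (hlt0 : s.arr + 56 * s.imgs.length < 2 ^ 64)
    (hlt : ∀ j (hj : j < s.imgs.length), k < j → ∀ o, o ∈ Img.structs s.imgs[j] → o.1 + o.2 < 2 ^ 64)
    (hg : ImgAt (s.arr + 56 * k) (doneImg s.imgs[k]) mem') :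
    SavedAt (some { s with imgs := imgsAt s (k + 1) }) p c mem' := by
  obtain ⟨k1, k2, k3, k4, k5⟩ := h
  refine ⟨k1, ?_, ?_, k4, ?_⟩
  · show c = (imgsAt s (k + 1)).length
    rw [imgsAt_length]
    have e : c = (imgsAt s k).length := k2
    rw [imgsAt_length] at e
    exact e
  · show (imgsAt s (k + 1)).length ≤ s.cap
    rw [imgsAt_length]
    have e : (imgsAt s k).length ≤ s.cap := k3
    rw [imgsAt_length] at e
    exact e
  · intro j hj
    have hj1 : j < (imgsAt s (k + 1)).length := hj
    have hj' : j < s.imgs.length := by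
      rw [imgsAt_length] at hj1
      exact hj1
    have hj0 : j < (imgsAt s k).length := by
      rw [imgsAt_length]
      exact hj'
    have hold : ImgAt (s.arr + 56 * j) (imgsAt s k)[j] mem := k5 j hj0
    show ImgAt (s.arr + 56 * j) (imgsAt s (k + 1))[j] mem'
    by_cases hjk : j < k
    · rw [imgsAt_lt s (k + 1) j hj' (by omega) hj1]
      rw [imgsAt_lt s k j hj' hjk hj0] at hold
      apply hold.frame (hslot j hj' (by omega))
      · intro o ho
        rw [doneImg_structs] at ho
        exact absurd ho List.not_mem_nil
      · omega
      · intro x hx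
        exact absurd hx (by simp only [doneImg, reduceCtorEq, not_false_eq_true])
      · intro x hx
        exact absurd hx (by simp only [doneImg, reduceCtorEq, not_false_eq_true])
    · by_cases hjk' : j = k
      · subst hjk'
        rw [imgsAt_lt s (j + 1) j hj' (by omega) hj1]
        exact hg
      · rw [imgsAt_ge s (k + 1) j hj' (by omega) hj1]
        rw [imgsAt_ge s k j hj' (by omega) hj0] at hold
        apply hold.frame (hslot j hj' hjk')
        · intro o ho
          exact hstruct j hj' (by omega) o ho
        · omega
        · intro x hx
          have hmem : (x.obj, 24) ∈ Img.structs s.imgs[j] := by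
            unfold Img.structs
            rw [hx]
            simp only [Map.structs, List.mem_append, List.mem_singleton, true_or]
          exact hlt j hj' (by omega) (x.obj, 24) hmem
        · intro x hx
          have hmem : (x.arr, 24 * x.blocks.length) ∈ Img.structs s.imgs[j] := by
            unfold Img.structs
            rw [hx]
            simp only [Exts.structs, List.mem_append, List.mem_singleton, or_true]
          exact hlt j hj' (by omega) (x.arr, 24 * x.blocks.length) hmem

/-- The structural parts of an image from `k` on are structural parts of the forest at the head. -/
theorem fs2_struct_mem (s : Saved) (k j : Nat) (hj : j < s.imgs.length) (hkj : k ≤ j) {o : Nat × Nat}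
    (ho : o ∈ Img.structs s.imgs[j]) : o ∈ (imgsAt s k).flatMap Img.structs := by
  have hj0 : j < (imgsAt s k).length := by
    rw [imgsAt_length]
    exact hj
  apply List.mem_flatMap.mpr
  refine ⟨(imgsAt s k)[j], List.getElem_mem hj0, ?_⟩
  rw [imgsAt_ge s k j hj hkj hj0]
  exact ho

/-- **WHAT A WINDOW OF A ROUND MISSES**: `gif.ImageCount`, `gif.SavedImages`, the structural parts of the images from `k` on, every
other slot of the array, and the fields `Width`, `Height`, `RasterBits` of slot `k`. -/
theorem fs2_win_miss {H : Heap} {F : Forest} {R : Rd} {s : Saved} {k : Nat} (G : carry_Geo (heapAt H s k) (forestAt F s k) R)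
    {x : HObj} (hx : x ∈ (heapAt H s k).objs) (hb : x.base = s.arr) (hcap : 56 * s.cap ≤ x.cap) (hk : k < s.imgs.length)
    (hle : s.imgs.length ≤ s.cap) {w : Span} (hw : fs2_WinOK2 H F R s k w) :
    (w.hi ≤ F.gif + 32 ∨ F.gif + 36 ≤ w.lo) ∧
    (w.hi ≤ F.gif + 72 ∨ F.gif + 80 ≤ w.lo) ∧
    (w.hi ≤ R.cur ∨ R.cur + 16 ≤ w.lo) ∧
    (∀ o, o ∈ (imgsAt s k).flatMap Img.structs → w.hi ≤ o.1 ∨ o.1 + o.2 ≤ w.lo) ∧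
    (∀ j, j < s.imgs.length → j ≠ k → w.hi ≤ s.arr + 56 * j ∨ s.arr + 56 * j + 56 ≤ w.lo) ∧
    (w.hi ≤ s.arr + 56 * k ∨ s.arr + 56 * k + 24 ≤ w.lo) ∧
    (w.hi ≤ s.arr + 56 * k + 32 ∨ s.arr + 56 * k + 40 ≤ w.lo) := by
  have harr : ∀ w : Span, s.arr + 56 * k ≤ w.lo → w.hi ≤ s.arr + 56 * k + 56 →
      (w.hi ≤ F.gif ∨ F.gif + 120 ≤ w.lo) ∧ (w.hi ≤ R.cur ∨ R.cur + 16 ≤ w.lo) ∧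
      (∀ o, o ∈ (imgsAt s k).flatMap Img.structs → w.hi ≤ o.1 ∨ o.1 + o.2 ≤ w.lo) := by
    intro w h1 h2
    exact fs2_in_arr G hx hb (by omega) (by omega)
  rcases hw with (hl | hcm) | hcell
  · have hoff : carry_Off (forestAt F s k) R True True True True True w := carry_Off.of_loose G hl
    have hin : (s.arr, 56 * (imgsAt s k).length) ∈ Saved.structs (forestAt F s k).saved := by
      rw [forestAt_saved]
      simp only [Saved.structs, List.mem_cons, true_or]
    have harrw := hoff.savS trivial _ hin
    rw [imgsAt_length] at harrw
    simp only at harrw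
    have h1 := hoff.cntF trivial
    have h2 := hoff.savF trivial
    have h3 := hoff.cursor trivial
    rw [forestAt_gif] at h1 h2
    refine ⟨h1, h2, h3, ?_, ?_, ?_, ?_⟩
    · intro o ho
      apply hoff.savS trivial o
      rw [forestAt_saved]
      simp only [Saved.structs, List.mem_cons]
      exact Or.inr ho
    · intro j hj hne
      omega
    · omega
    · omega
  · obtain ⟨a1, a2, a3⟩ := harr w (by omega) (by omega)
    refine ⟨by omega, by omega, a2, a3, ?_, by omega, by omega⟩
    intro j hj hne
    omega
  · obtain ⟨a1, a2, a3⟩ := harr w (by omega) (by omega)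
    refine ⟨by omega, by omega, a2, a3, ?_, by omega, by omega⟩
    intro j hj hne
    omega

/-- **THE SHAPE ONE ROUND LATER**: the memory differs from the head's in windows of a round, and the colour-map field and the two
cells of slot `k` hold NULL, NULL and 0: the shape of the forest after `k + 1` rounds. -/
theorem fs2_round_shape {H : Heap} {F : Forest} {R : Rd} {s : Saved} {k : Nat} {m0 m' : Mem} {ws : List Span}
    (hshape : Shape (forestAt F s k) R m0) (hplaced : Placed (heapAt H s k) F.owned) (hok : HeapOK (heapAt H s k) m0)
    (hcur : 0x700000 ≤ R.cur ∧ R.cur + 16 ≤ 0x800000) (hs : F.saved = some s) (hk : k < s.imgs.length)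
    (hsame : Mem.SameExcept ws m0 m') (hw : ∀ w, w ∈ ws → fs2_WinOK2 H F R s k w)
    (h1 : rd m' (s.arr + 56 * k + 24) 8 = 0) (h2 : rd m' (s.arr + 56 * k + 48) 8 = 0)
    (h3 : rd m' (s.arr + 56 * k + 40) 4 = 0) : Shape (forestAt F s (k + 1)) R m' := by
  have hpk := placedAt hplaced hs k
  have G := carry_Geo.intro hshape hpk hok hcur
  obtain ⟨x, hx, hb, hcap⟩ := fs2_arr_obj hplaced hs
  have hsh := hshape.saved
  rw [forestAt_saved, forestAt_gif] at hsh
  have hle : s.imgs.length ≤ s.cap := by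
    have := hsh.2.2.1
    simp only [imgsAt_length] at this
    exact this
  have hxin := G.inData x hx
  have hmiss := fun w hin => fs2_win_miss G hx hb hcap hk hle (hw w hin)
  have hE : ∀ lo hi, (∀ w, w ∈ ws → hi ≤ w.lo ∨ w.hi ≤ lo) → Mem.EqOn lo hi m0 m' := by
    intro lo hi hd
    exact hsame.eqOn lo hi hd
  have hlt : ∀ o, o ∈ (imgsAt s k).flatMap Img.structs → o.1 + o.2 < 2 ^ 64 := by
    intro o ho
    have hos : o ∈ (forestAt F s k).structs := by
      apply carry_mem_structs_saved
      rw [forestAt_saved]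
      simp only [Saved.structs, List.mem_cons]
      exact Or.inr ho
    obtain ⟨y, hy, e, hc⟩ := G.structObj o hos
    have := G.inData y hy
    omega
  have hggif := G.gifObj
  obtain ⟨xg, hxg, eg, cg⟩ := hggif
  have hgin := G.inData xg hxg
  rw [forestAt_gif] at eg
  apply Shape.set_saved hshape hpk hok hcur hsame ?_ (some { s with imgs := imgsAt s (k + 1) })
  · -- the array's shape in the new memory
    have e1 : GifFileType.SavedImages m' (forestAt F s k).gif = GifFileType.SavedImages m0 F.gif := by
      rw [forestAt_gif]
      simp only [gfield]
      apply (hE (F.gif + 72) (F.gif + 80) ?_).rd (F.gif + 72) 8 (by omega) (by omega) (by omega)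
      intro w hin
      have := (hmiss w hin).2.1
      omega
    have e2 : GifFileType.ImageCount m' (forestAt F s k).gif = GifFileType.ImageCount m0 F.gif := by
      rw [forestAt_gif]
      simp only [gfield]
      apply (hE (F.gif + 32) (F.gif + 36) ?_).rd (F.gif + 32) 4 (by omega) (by omega) (by omega)
      intro w hin
      have := (hmiss w hin).1
      omega
    rw [e1, e2]
    have hold := hsh.2.2.2.2 k (by
      show k < (imgsAt s k).length
      rw [imgsAt_length]
      exact hk)
    have hkk : k < (imgsAt s k).length := by
      rw [imgsAt_length]
      exact hk
    have hold' : ImgAt (s.arr + 56 * k) s.imgs[k] m0 := by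
      have := hsh.2.2.2.2 k hkk
      simp only at this
      rw [imgsAt_ge s k k hk (Nat.le_refl _) hkk] at this
      exact this
    apply fs2_savedAt_round hk hsh
    · intro j hj hne
      apply hE
      intro w hin
      have := (hmiss w hin).2.2.2.2.1 j hj hne
      omega
    · intro j hj hkj o ho
      apply hE
      intro w hin
      have := (hmiss w hin).2.2.2.1 o (fs2_struct_mem s k j hj (by omega) ho)
      omega
    · omega
    · intro j hj hkj o ho
      exact hlt o (fs2_struct_mem s k j hj (by omega) ho)
    · -- slot `k` is done
      have eA : Mem.EqOn (s.arr + 56 * k) (s.arr + 56 * k + 24) m0 m' := by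
        apply hE
        intro w hin
        have := (hmiss w hin).2.2.2.2.2.1
        omega
      have eB : Mem.EqOn (s.arr + 56 * k + 32) (s.arr + 56 * k + 40) m0 m' := by
        apply hE
        intro w hin
        have := (hmiss w hin).2.2.2.2.2.2
        omega
      refine ⟨?_, ?_, ?_⟩
      · show SavedImage.ImageDesc.ColorMap m' (s.arr + 56 * k) = 0
        simp only [gfield]
        exact h1
      · have hr := hold'.raster
        show RasterAt s.imgs[k].raster (s.arr + 56 * k) m'
        have f1 : SavedImage.RasterBits m' (s.arr + 56 * k) = SavedImage.RasterBits m0 (s.arr + 56 * k) := by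
          simp only [gfield]
          exact eB.rd (s.arr + 56 * k + 32) 8 (by omega) (by omega) (by omega)
        have f2 : SavedImage.ImageDesc.Width m' (s.arr + 56 * k) = SavedImage.ImageDesc.Width m0 (s.arr + 56 * k) := by
          simp only [gfield]
          exact eA.rd (s.arr + 56 * k + 8) 4 (by omega) (by omega) (by omega)
        have f3 : SavedImage.ImageDesc.Height m' (s.arr + 56 * k) = SavedImage.ImageDesc.Height m0 (s.arr + 56 * k) := by
          simp only [gfield]
          exact eA.rd (s.arr + 56 * k + 12) 4 (by omega) (by omega) (by omega)
        unfold RasterAt at hr ⊢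
        cases hrr : s.imgs[k].raster with
        | none =>
          rw [hrr] at hr
          simp only at hr ⊢
          rw [f1]
          exact hr
        | some r =>
          rw [hrr] at hr
          simp only at hr ⊢
          rw [f1, f2, f3]
          exact hr
      · show SavedImage.ExtensionBlocks m' (s.arr + 56 * k) = 0 ∧ SavedImage.ExtensionBlockCount m' (s.arr + 56 * k) = 0
        simp only [gfield]
        exact ⟨h2, h3⟩
  · -- every window is loose or inside the array's object
    intro w hin
    rcases hw w hin with (hl | hcm) | hcell
    · exact Or.inl hl
    · right
      right
      right
      refine ⟨{ s with imgs := imgsAt s k }, x, forestAt_saved F s k, hx, hb, ?_, ?_⟩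
      · show s.arr ≤ w.lo
        omega
      · show w.hi ≤ s.arr + x.cap
        omega
    · right
      right
      right
      refine ⟨{ s with imgs := imgsAt s k }, x, forestAt_saved F s k, hx, hb, ?_, ?_⟩
      · show s.arr ≤ w.lo
        omega
      · show w.hi ≤ s.arr + x.cap
        omega


/-! ### 2. The assertion inside a round -/

/-- The address 107F6EH (gifalloc.c:444): the colour map of slot `k` is dealt with. -/
abbrev fs2_cut2 : Word := 0x107f6e

/-- The address 107F07H (gifalloc.c:448, the latch): the raster of slot `k` is dealt with. -/
abbrev fs2_cut3 : Word := 0x107f07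

/-- **INSIDE ROUND `k`** at the address `cut`, the round having started at the head state `v0`: the pointers `ps` are freed since the
head, the objects `todo` of image `k` are still to be freed; every window written since the head is loose (for the heap and the
forest AT THE HEAD) or the colour-map field of slot `k`, which holds NULL. -/
structure fs2_Mid (cut : Word) (ps : List Nat) (todo : List (Nat × Nat)) (H : Heap) (rest : List Obj)
    (frames : List (Nat × FrameLayout)) (F : Forest) (R : Rd) (s : Saved) (k : Nat) (u₀ e : State) (ret : Word) (v0 v : State) :
    Prop where
  /-- the round started at the head state `v0` -/
  head : Head H rest frames F R s k u₀ e ret v0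
  /-- the slot is a counted one -/
  lt : k < s.imgs.length
  rip : v.rip = cut
  rsp : v.reg .rsp = e.reg .rsp - 24
  rbp : v.reg .rbp = e.reg .rdi
  /-- `rbx = sp`, the slot of this round -/
  rbx : (v.reg .rbx).toNat = s.arr + 56 * k
  r13 : v.reg .r13 = e.reg .r13
  r14 : v.reg .r14 = e.reg .r14
  r15 : v.reg .r15 = e.reg .r15
  slot_r12 : v.mem.readLE (e.reg .rsp - 8) 8 = (e.reg .r12).toNat
  slot_rbp : v.mem.readLE (e.reg .rsp - 16) 8 = (e.reg .rbp).toNat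
  slot_rbx : v.mem.readLE (e.reg .rsp - 24) 8 = (e.reg .rbx).toNat
  slot_ra : UInt64.ofNat (v.mem.readLE (e.reg .rsp) 8) = ret
  /-- the heap's invariant for the head's heap with `ps` freed -/
  inv : HeapInv ((heapAt H s k).releaseAll ps) rest frames ((e.reg .rsp).toNat - 24) v.mem
  /-- what is still live -/
  owns : Owns ((heapAt H s k).releaseAll ps) ((s.arr, 56 * s.cap) :: (todo ++ fs2_tail F s k))
  /-- what was written since the head -/
  wins : ∃ ws, Mem.SameExcept ws v0.mem v.mem ∧ ∀ w, w ∈ ws → fs2_WinOK H F R s k w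
  /-- `sp->ImageDesc.ColorMap = NULL` -/
  cm0 : rd v.mem (s.arr + 56 * k + 24) 8 = 0
  same : Mem.SameExcept
    [⟨(e.reg .rsp).toNat - 112, (e.reg .rsp).toNat⟩,
     ⟨0x800000, 0x1000020⟩] e.mem v.mem
  code : (conv u₀).code.In v.mem
  abi : (conv u₀).inv v

/-- **Freeing the first objects behind the head of what is owned** keeps the head and the others. -/
theorem fs2_owns_step {Hc : Heap} {a : Nat × Nat} {X Y : List (Nat × Nat)} (h : Owns Hc (a :: (X ++ Y))) :
    Owns (Hc.releaseAll (X.map Prod.fst)) (a :: Y) := by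
  have hp : (a :: (X ++ Y)).Perm (X ++ a :: Y) := List.perm_middle.symm
  exact (h.perm hp).releaseAll

/-- What is live at the head, with the objects of image `k` in front. -/
theorem fs2_owns_head {H : Heap} {F : Forest} {s : Saved} {k : Nat} (hk : k < s.imgs.length)
    (h : Owns (heapAt H s k) (liveAt F s k)) :
    Owns (heapAt H s k) ((s.arr, 56 * s.cap) ::
      (Map.objs s.imgs[k].cm ++ ((rasterObjs s.imgs[k].raster ++ Exts.objs s.imgs[k].ext) ++ fs2_tail F s k))) := by
  rw [liveAt_succ F s k hk] at h
  have e : Img.objs s.imgs[k] = Map.objs s.imgs[k].cm ++ rasterObjs s.imgs[k].raster ++ Exts.objs s.imgs[k].ext := rfl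
  rw [e] at h
  unfold fs2_tail
  simp only [List.append_assoc] at h ⊢
  exact h

/-! ### 3. The walks -/

/-- `&SavedImages[n]` as the code computes it. -/
theorem fs2_times56 (x : UInt64) : (x * 8 - x) * 8 = 56 * x := by
  bv_decide

/-- `&SavedImages[n]`, as a word. -/
theorem fs2_slot_word (a n : Nat) :
    UInt64.ofNat a + (UInt64.ofNat n * 8 - UInt64.ofNat n) * 8 = UInt64.ofNat (a + 56 * n) := by
  rw [fs2_times56]
  simp only [UInt64.ofNat_add, UInt64.ofNat_mul]
  rfl

/-- **A store into the stack below the cursor keeps the heap's invariant and the shape.** -/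
theorem fs2_stack_step {Hc : Heap} {rest : List Obj} {frames : List (Nat × FrameLayout)} {top : Nat} {F' : Forest} {R : Rd}
    {m m' : Mem} {a b : Nat} (hinv : HeapInv Hc rest frames top m) (hshape : Shape F' R m) (hplaced : Placed Hc F'.owned)
    (hcur : 0x700000 ≤ R.cur ∧ R.cur + 16 ≤ 0x800000) (hs : Mem.SameExcept [⟨a, b⟩] m m') (hun : ShadowUntouched m m')
    (hbase : Hc.base = 0x800000) (h1 : 0x700000 ≤ a) (h2 : b ≤ R.cur) (h3 : b ≤ 0x800000) :
    HeapInv Hc rest frames top m' ∧ Shape F' R m' := by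
  refine ⟨?_, ?_⟩
  · apply hinv.sameExcept hun hs
    intro w hw
    have e := List.mem_singleton.mp hw
    rw [e, hbase]
    left
    left
    exact h3
  · apply hshape.sameExcept hplaced hinv.heap hcur hs
    intro w hw
    have e := List.mem_singleton.mp hw
    rw [e]
    exact Loose.stack hinv.heap h1 h3 h2

/-- **107F18H … 107F87H, every slot done** (`k = length`; gifalloc.c:438): the two checked loads, `sp >= end`: the loop's exit. -/
theorem fs2_head_exit (Lay : Layout) (hLay : Lay.hi = 0x1000000) (μ : Microarch) (hμ : UserX.MicroOK μ) (u₀ : State)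
    (hcode : HasCodeNat Lay u₀ Gif.L.GifFreeSavedImages.entry Gif.Code.code_GifFreeSavedImages.nat Gif.L.GifFreeSavedImages.size)
    (h_load8 : Asan.SmallCheck Lay μ ProgX.Base.WayInv (ProgX.Base.CodeOK u₀) [.rax, .rcx, .rdx] 8 ProgX.Base.L.__asan_load8_noabort.entry)
    (h_load4 : Asan.SmallCheck Lay μ ProgX.Base.WayInv (ProgX.Base.CodeOK u₀) [.rax, .rcx, .rdx] 4 ProgX.Base.L.__asan_load4_noabort.entry)
    (H : Heap) (rest : List Obj) (frames : List (Nat × FrameLayout)) (F : Forest) (R : Rd) (s : Saved) (e : State)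
    (ret : Word) (v : State) (hat : Head H rest frames F R s s.imgs.length u₀ e ret v) :
    ReachVia Lay μ ProgX.Base.WayInv v (AtExit H rest frames F R s u₀ e ret) := by
  obtain ⟨hloop, hrbx⟩ := hat
  have he := hloop.entry
  v_entry he
  obtain ⟨henv, hrdi, hsv⟩ := hloop.pre
  have w_rip := hloop.rip
  have c_rsp : v.reg .rsp = e.reg .rsp - 24 := hloop.rsp
  have c_rbp : v.reg .rbp = e.reg .rdi := hloop.rbp
  have w_kept : RegsKept [.rsp] v v := RegsKept.refl _ _
  have w_eq : Mem.EqOn ProgX.Base.L.textLo ProgX.Base.L.textHi u₀.mem v.mem := ProgX.Base.conv_code_eqOn hloop.code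
  have hdf := (show abiInv _ from hloop.abi).1
  have hmx := (show abiInv _ from hloop.abi).2
  have hsse := ProgX.Base.sseOK_of_abiInv hloop.abi
  have k_r12 : v.mem.readLE (e.reg .rsp - 8) 8 = (e.reg .r12).toNat := hloop.slot_r12
  have k_rbp : v.mem.readLE (e.reg .rsp - 16) 8 = (e.reg .rbp).toNat := hloop.slot_rbp
  have k_rbx : v.mem.readLE (e.reg .rsp - 24) 8 = (e.reg .rbx).toNat := hloop.slot_rbx
  have k_ra : UInt64.ofNat (v.mem.readLE (e.reg .rsp) 8) = ret := hloop.slot_ra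
  have hsame : Mem.SameExcept
    [⟨(e.reg .rsp).toNat - 112, (e.reg .rsp).toNat⟩,
     ⟨0x800000, 0x1000020⟩] e.mem v.mem := hloop.same
  have hcur := henv.ctx.cursor_range henv.heap.inv.shadow
  have hbase := henv.heap.base
  have hlimit := henv.heap.limit
  -- gif is live in the heap after the rounds
  have hgmem : (F.gif, 120) ∈ liveAt F s s.imgs.length := by
    unfold liveAt Forest.ownedButSaved
    simp only [List.mem_cons, List.mem_append, true_or, or_true]
  have hok := hloop.inv.heap
  have hgin := hloop.owns.inside hok hgmem
  have hglive := hloop.owns.live _ hgmem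
  have hbase' : (heapAt H s s.imgs.length).base = 0x800000 := by
    rw [← hbase]
    exact (SameRegion.releaseAll H _).1
  rw [hbase'] at hgin
  simp only at hgin hglive
  have hg1 := hgin.1
  have hg2 := hgin.2.2.2.2
  clear hgin
  -- the array
  have hamem : (s.arr, 56 * s.cap) ∈ liveAt F s s.imgs.length := by
    unfold liveAt
    exact List.mem_cons_self
  have hain := hloop.owns.inside hok hamem
  rw [hbase'] at hain
  simp only at hain
  have ha1 := hain.1
  have ha2 := hain.2.2.2.2
  clear hain
  have hsh := hloop.shape.saved
  rw [forestAt_saved, forestAt_gif] at hsh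
  obtain ⟨q1, q2, q3, q4, q5⟩ := hsh
  simp only [gfield] at q1 q2
  simp only [imgsAt_length] at q2 q3
  have l_saved : v.mem.readLE (e.reg .rdi + 0x48) 8 = s.arr := by
    rw [rd_eq_readLE v.mem _ (F.gif + 72) 8 (by u_omega)]
    exact q1
  have l_count : v.mem.readLE (e.reg .rdi + 0x20) 4 = s.imgs.length := by
    rw [rd_eq_readLE v.mem _ (F.gif + 32) 4 (by u_omega)]
    exact q2
  have hlen : s.imgs.length < 2 ^ 31 := by omega
  have hsx : Word.ofBV (BitVec.signExtend 64 (BitVec.ofNat 32 s.imgs.length)) = UInt64.ofNat s.imgs.length := by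
    rw [sext32_bv _ (by rw [BitVec.toNat_ofNat]; omega), BitVec.toNat_ofNat]
    congr 1
    omega
  have hsw := fs2_slot_word s.arr s.imgs.length
  u_walk hcode [hμ.vendor, hsx, hsw] until [Gif.L.GifFreeSavedImages.chk4, Gif.L.GifFreeSavedImages.at_107f87] span [ProgX.Base.L.textLo, ProgX.Base.L.textHi] side (v_side)
  case check_107f1c =>
    have hun : ShadowUntouched v.mem s_107f1c.mem := by v_untouched
    exact (hglive.liveIn rest frames (Nat.le_refl _) (Nat.le_refl _)).accSmall hloop.inv.shadow hun _ 8 (by decide) (by u_omega) (by u_omega)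
  case check_107f29 =>
    have hun : ShadowUntouched v.mem s_107f29.mem := by v_untouched
    exact (hglive.liveIn rest frames (Nat.le_refl _) (Nat.le_refl _)).accSmall hloop.inv.shadow hun _ 4 (by decide) (by u_omega) (by u_omega)
  -- 107F87H: the loop's exit. Only the return addresses of the two checks were stored, below the stack pointer
  have hun : ShadowUntouched v.mem s_107f44.mem := by v_untouched
  have hs1 : Mem.SameExcept [⟨(e.reg .rsp).toNat - 32, (e.reg .rsp).toNat - 24⟩] v.mem s_107f44.mem := by
    rw [w_mem]
    u_same
  obtain ⟨hinv1, hshape1⟩ := fs2_stack_step hloop.inv hloop.shape (placedAt hloop.placed hloop.saved _) ⟨hcur.1, hcur.2.1⟩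
    hs1 hun hbase' (by omega) (by omega) (by omega)
  have hs12 : s_107f44.mem.readLE (e.reg .rsp - 8) 8 = (e.reg .r12).toNat := by
    rw [w_mem]
    u_frame k_r12
  have hsbp : s_107f44.mem.readLE (e.reg .rsp - 16) 8 = (e.reg .rbp).toNat := by
    rw [w_mem]
    u_frame k_rbp
  have hsbx : s_107f44.mem.readLE (e.reg .rsp - 24) 8 = (e.reg .rbx).toNat := by
    rw [w_mem]
    u_frame k_rbx
  have hsra : UInt64.ofNat (s_107f44.mem.readLE (e.reg .rsp) 8) = ret := by
    rw [w_mem]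
    u_frame k_ra
  have hsame1 : Mem.SameExcept
    [⟨(e.reg .rsp).toNat - 112, (e.reg .rsp).toNat⟩,
     ⟨0x800000, 0x1000020⟩] e.mem s_107f44.mem := by
    rw [w_mem]
    u_same
  have hrem1 : rem R s_107f44.mem = rem R e.mem := by
    apply rem_sameExcept hsame1 (by omega)
    intro w hw
    simp only [List.mem_cons, List.mem_nil_iff, or_false] at hw
    rcases hw with rfl | rfl
    · simp only
      omega
    · simp only
      omega
  refine ReachVia.done ⟨?_, ?_⟩
  · exact {
      entry := hloop.entry
      pre := hloop.pre
      saved := hloop.saved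
      le := Nat.le_refl _
      rip := w_rip
      rsp := w_rsp
      rbp := (w_kept.get .rbp rfl).trans c_rbp
      r13 := (w_kept.get .r13 rfl).trans hloop.r13
      r14 := (w_kept.get .r14 rfl).trans hloop.r14
      r15 := (w_kept.get .r15 rfl).trans hloop.r15
      slot_r12 := hs12
      slot_rbp := hsbp
      slot_rbx := hsbx
      slot_ra := hsra
      inv := hinv1
      owns := hloop.owns
      placed := hloop.placed
      shape := hshape1
      rem := hrem1
      same := hsame1
      code := ProgX.Base.conv_code_in w_eq
      abi := by v_inv
    }
  · rw [w_r12]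
    exact toNat_ofNat_addr s.arr (by omega)


/-- **107F18H … 107F6EH, slot `k` without a colour map** (gifalloc.c:438-439): the checked loads of the head, `sp < end`, the checked
load of `sp->ImageDesc.ColorMap`: NULL. -/
theorem fs2_head_none (Lay : Layout) (hLay : Lay.hi = 0x1000000) (μ : Microarch) (hμ : UserX.MicroOK μ) (u₀ : State)
    (hcode : HasCodeNat Lay u₀ Gif.L.GifFreeSavedImages.entry Gif.Code.code_GifFreeSavedImages.nat Gif.L.GifFreeSavedImages.size)
    (h_load8 : Asan.SmallCheck Lay μ ProgX.Base.WayInv (ProgX.Base.CodeOK u₀) [.rax, .rcx, .rdx] 8 ProgX.Base.L.__asan_load8_noabort.entry)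
    (h_load4 : Asan.SmallCheck Lay μ ProgX.Base.WayInv (ProgX.Base.CodeOK u₀) [.rax, .rcx, .rdx] 4 ProgX.Base.L.__asan_load4_noabort.entry)
    (H : Heap) (rest : List Obj) (frames : List (Nat × FrameLayout)) (F : Forest) (R : Rd) (s : Saved) (k : Nat) (e : State)
    (ret : Word) (v : State) (hat : Head H rest frames F R s k u₀ e ret v) (hk : k < s.imgs.length)
    (hcm : s.imgs[k].cm = none) :
    ReachVia Lay μ ProgX.Base.WayInv v
      (fs2_Mid fs2_cut2 [] (rasterObjs s.imgs[k].raster ++ Exts.objs s.imgs[k].ext) H rest frames F R s k u₀ e ret v) := by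
  obtain ⟨hloop, hrbx⟩ := hat
  have hat0 : Head H rest frames F R s k u₀ e ret v := ⟨hloop, hrbx⟩
  have he := hloop.entry
  v_entry he
  obtain ⟨henv, hrdi, hsv⟩ := hloop.pre
  have w_rip := hloop.rip
  have c_rsp : v.reg .rsp = e.reg .rsp - 24 := hloop.rsp
  have c_rbp : v.reg .rbp = e.reg .rdi := hloop.rbp
  have w_kept : RegsKept [.rsp] v v := RegsKept.refl _ _
  have w_eq : Mem.EqOn ProgX.Base.L.textLo ProgX.Base.L.textHi u₀.mem v.mem := ProgX.Base.conv_code_eqOn hloop.code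
  have hdf := (show abiInv _ from hloop.abi).1
  have hmx := (show abiInv _ from hloop.abi).2
  have hsse := ProgX.Base.sseOK_of_abiInv hloop.abi
  have k_r12 : v.mem.readLE (e.reg .rsp - 8) 8 = (e.reg .r12).toNat := hloop.slot_r12
  have k_rbp : v.mem.readLE (e.reg .rsp - 16) 8 = (e.reg .rbp).toNat := hloop.slot_rbp
  have k_rbx : v.mem.readLE (e.reg .rsp - 24) 8 = (e.reg .rbx).toNat := hloop.slot_rbx
  have k_ra : UInt64.ofNat (v.mem.readLE (e.reg .rsp) 8) = ret := hloop.slot_ra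
  have hsame : Mem.SameExcept
    [⟨(e.reg .rsp).toNat - 112, (e.reg .rsp).toNat⟩,
     ⟨0x800000, 0x1000020⟩] e.mem v.mem := hloop.same
  have hcur := henv.ctx.cursor_range henv.heap.inv.shadow
  have hbase := henv.heap.base
  have hlimit := henv.heap.limit
  -- gif is live in the heap after `k` rounds
  have hgmem : (F.gif, 120) ∈ liveAt F s k := by
    unfold liveAt Forest.ownedButSaved
    simp only [List.mem_cons, List.mem_append, true_or, or_true]
  have hok := hloop.inv.heap
  have hgin := hloop.owns.inside hok hgmem
  have hglive := hloop.owns.live _ hgmem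
  have hbase' : (heapAt H s k).base = 0x800000 := by
    rw [← hbase]
    exact (SameRegion.releaseAll H _).1
  have hlimit' : (heapAt H s k).limit = 0xC00000 := by
    rw [← hlimit]
    exact (SameRegion.releaseAll H _).2
  rw [hbase'] at hgin
  simp only at hgin hglive
  have hg1 := hgin.1
  have hg2 := hgin.2.2.2.2
  clear hgin
  -- the array is live too
  have hamem : (s.arr, 56 * s.cap) ∈ liveAt F s k := by
    unfold liveAt
    exact List.mem_cons_self
  have hain := hloop.owns.inside hok hamem
  have halive := hloop.owns.live _ hamem
  rw [hbase'] at hain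
  simp only at hain halive
  have ha1 := hain.1
  have ha2 := hain.2.2.2.2
  clear hain
  -- `gif.SavedImages`, `gif.ImageCount` and slot `k`, from the shape
  have hsh := hloop.shape.saved
  rw [forestAt_saved, forestAt_gif] at hsh
  obtain ⟨q1, q2, q3, q4, q5⟩ := hsh
  simp only [gfield] at q1 q2
  simp only [imgsAt_length] at q2 q3
  have hkk : k < (imgsAt s k).length := by
    rw [imgsAt_length]
    exact hk
  have hslot : ImgAt (s.arr + 56 * k) s.imgs[k] v.mem := by
    have := q5 k hkk
    simp only at this
    rw [imgsAt_ge s k k hk (Nat.le_refl _) hkk] at this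
    exact this
  clear q5
  have l_saved : v.mem.readLE (e.reg .rdi + 0x48) 8 = s.arr := by
    rw [rd_eq_readLE v.mem _ (F.gif + 72) 8 (by u_omega)]
    exact q1
  have l_count : v.mem.readLE (e.reg .rdi + 0x20) 4 = s.imgs.length := by
    rw [rd_eq_readLE v.mem _ (F.gif + 32) 4 (by u_omega)]
    exact q2
  have hlen : s.imgs.length < 2 ^ 31 := by omega
  have hsx : Word.ofBV (BitVec.signExtend 64 (BitVec.ofNat 32 s.imgs.length)) = UInt64.ofNat s.imgs.length := by
    rw [sext32_bv _ (by rw [BitVec.toNat_ofNat]; omega), BitVec.toNat_ofNat]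
    congr 1
    omega
  have hsw := fs2_slot_word s.arr s.imgs.length
  -- the colour-map field of slot `k` holds NULL
  have hcmf := hslot.cm
  rw [hcm] at hcmf
  have hcm0 : rd v.mem (s.arr + 56 * k + 24) 8 = 0 := by
    have : SavedImage.ImageDesc.ColorMap v.mem (s.arr + 56 * k) = 0 := hcmf
    simp only [gfield] at this
    exact this
  have l_cm : v.mem.readLE (v.reg .rbx + 0x18) 8 = 0 := by
    rw [rd_eq_readLE v.mem _ (s.arr + 56 * k + 24) 8 (by u_omega)]
    exact hcm0
  u_walk hcode [hμ.vendor, hsx, hsw] until [fs2_cut2, Gif.L.GifFreeSavedImages.at_107f87] span [ProgX.Base.L.textLo, ProgX.Base.L.textHi] side (v_side)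
  case check_107f1c =>
    have hun : ShadowUntouched v.mem s_107f1c.mem := by v_untouched
    exact (hglive.liveIn rest frames (Nat.le_refl _) (Nat.le_refl _)).accSmall hloop.inv.shadow hun _ 8 (by decide) (by u_omega) (by u_omega)
  case check_107f29 =>
    have hun : ShadowUntouched v.mem s_107f29.mem := by v_untouched
    exact (hglive.liveIn rest frames (Nat.le_refl _) (Nat.le_refl _)).accSmall hloop.inv.shadow hun _ 4 (by decide) (by u_omega) (by u_omega)
  case check_107f4a =>
    -- 0x107f4a (gifalloc.c:439): `sp->ImageDesc.ColorMap` lies inside the live array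
    have hun : ShadowUntouched v.mem s_107f4a.mem := by v_untouched
    exact (halive.liveIn rest frames (Nat.le_refl _) (Nat.le_refl _)).accSmall hloop.inv.shadow hun _ 8 (by decide) (by u_omega) (by u_omega)
  -- 107F6EH: only the return addresses of the three checks were stored, below the stack pointer
  have hun : ShadowUntouched v.mem s_107f56.mem := by v_untouched
  have hs1 : Mem.SameExcept [⟨(e.reg .rsp).toNat - 32, (e.reg .rsp).toNat - 24⟩] v.mem s_107f56.mem := by
    rw [w_mem]
    u_same
  have hinv1 : HeapInv (heapAt H s k) rest frames ((e.reg .rsp).toNat - 24) s_107f56.mem := by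
    apply hloop.inv.sameExcept hun hs1
    intro w hw
    have hwe := List.mem_singleton.mp hw
    rw [hwe, hbase']
    left
    left
    show (e.reg .rsp).toNat - 24 ≤ 0x800000
    omega
  have hs12 : s_107f56.mem.readLE (e.reg .rsp - 8) 8 = (e.reg .r12).toNat := by
    rw [w_mem]
    u_frame k_r12
  have hsbp : s_107f56.mem.readLE (e.reg .rsp - 16) 8 = (e.reg .rbp).toNat := by
    rw [w_mem]
    u_frame k_rbp
  have hsbx : s_107f56.mem.readLE (e.reg .rsp - 24) 8 = (e.reg .rbx).toNat := by
    rw [w_mem]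
    u_frame k_rbx
  have hsra : UInt64.ofNat (s_107f56.mem.readLE (e.reg .rsp) 8) = ret := by
    rw [w_mem]
    u_frame k_ra
  have hsame1 : Mem.SameExcept
    [⟨(e.reg .rsp).toNat - 112, (e.reg .rsp).toNat⟩,
     ⟨0x800000, 0x1000020⟩] e.mem s_107f56.mem := by
    rw [w_mem]
    u_same
  have hcm1 : rd s_107f56.mem (s.arr + 56 * k + 24) 8 = 0 := by
    rw [← hcm0]
    apply (hs1.eqOn (s.arr + 56 * k + 24) (s.arr + 56 * k + 32) ?_).rd _ 8 (Nat.le_refl _) (Nat.le_refl _) (by omega)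
    intro w hw
    have hwe := List.mem_singleton.mp hw
    rw [hwe]
    simp only
    omega
  have howns := fs2_owns_head hk hloop.owns
  rw [hcm] at howns
  refine ReachVia.done ?_
  exact {
    head := hat0
    lt := hk
    rip := w_rip
    rsp := w_rsp
    rbp := (w_kept.get .rbp rfl).trans c_rbp
    rbx := by
      rw [w_kept.get .rbx rfl]
      exact hrbx
    r13 := (w_kept.get .r13 rfl).trans hloop.r13
    r14 := (w_kept.get .r14 rfl).trans hloop.r14
    r15 := (w_kept.get .r15 rfl).trans hloop.r15
    slot_r12 := hs12
    slot_rbp := hsbp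
    slot_rbx := hsbx
    slot_ra := hsra
    inv := hinv1
    owns := howns
    wins := by
      refine ⟨_, hs1, ?_⟩
      intro w hw
      have hwe := List.mem_singleton.mp hw
      rw [hwe]
      left
      exact Loose.stack hok (by simp only; omega) (by simp only; omega) (by simp only; omega)
    cm0 := hcm1
    same := hsame1
    code := ProgX.Base.conv_code_in w_eq
    abi := by v_inv
  }


/-- **107F18H … 107F6EH, slot `k` with a colour map** (gifalloc.c:438-441): the checked loads of the head, `sp < end`, the checked
load of `sp->ImageDesc.ColorMap`, `GifFreeMapObject(it)`, the checked store of NULL. -/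
theorem fs2_head_some (Lay : Layout) (hLay : Lay.hi = 0x1000000) (μ : Microarch) (hμ : UserX.MicroOK μ) (u₀ : State)
    (hcode : HasCodeNat Lay u₀ Gif.L.GifFreeSavedImages.entry Gif.Code.code_GifFreeSavedImages.nat Gif.L.GifFreeSavedImages.size)
    (h_load8 : Asan.SmallCheck Lay μ ProgX.Base.WayInv (ProgX.Base.CodeOK u₀) [.rax, .rcx, .rdx] 8 ProgX.Base.L.__asan_load8_noabort.entry)
    (h_load4 : Asan.SmallCheck Lay μ ProgX.Base.WayInv (ProgX.Base.CodeOK u₀) [.rax, .rcx, .rdx] 4 ProgX.Base.L.__asan_load4_noabort.entry)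
    (h_store8 : Asan.SmallCheck Lay μ ProgX.Base.WayInv (ProgX.Base.CodeOK u₀) [.rax, .rcx, .rdx] 8 ProgX.Base.L.__asan_store8_noabort.entry)
    (H : Heap) (rest : List Obj) (frames : List (Nat × FrameLayout)) (F : Forest) (R : Rd) (s : Saved) (k : Nat) (e : State)
    (ret : Word) (v : State) (hat : Head H rest frames F R s k u₀ e ret v) (hk : k < s.imgs.length)
    (m : Map) (hcm : s.imgs[k].cm = some m)
    (h_fm : Calls Lay μ ProgX.Base.WayInv (ProgX.Base.conv u₀) Gif.L.GifFreeMapObject.entry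
      (Gif.Spec.GifFreeMapObject.spec (heapAt H s k) rest frames m.colors (3 * m.count))) :
    ReachVia Lay μ ProgX.Base.WayInv v
      (fs2_Mid fs2_cut2 ((Map.objs (some m)).map Prod.fst) (rasterObjs s.imgs[k].raster ++ Exts.objs s.imgs[k].ext)
        H rest frames F R s k u₀ e ret v) := by
  obtain ⟨hloop, hrbx⟩ := hat
  have hat0 : Head H rest frames F R s k u₀ e ret v := ⟨hloop, hrbx⟩
  have he := hloop.entry
  v_entry he
  obtain ⟨henv, hrdi, hsv⟩ := hloop.pre
  have w_rip := hloop.rip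
  have c_rsp : v.reg .rsp = e.reg .rsp - 24 := hloop.rsp
  have c_rbp : v.reg .rbp = e.reg .rdi := hloop.rbp
  have w_kept : RegsKept [.rsp] v v := RegsKept.refl _ _
  have w_eq : Mem.EqOn ProgX.Base.L.textLo ProgX.Base.L.textHi u₀.mem v.mem := ProgX.Base.conv_code_eqOn hloop.code
  have hdf := (show abiInv _ from hloop.abi).1
  have hmx := (show abiInv _ from hloop.abi).2
  have hsse := ProgX.Base.sseOK_of_abiInv hloop.abi
  have k_r12 : v.mem.readLE (e.reg .rsp - 8) 8 = (e.reg .r12).toNat := hloop.slot_r12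
  have k_rbp : v.mem.readLE (e.reg .rsp - 16) 8 = (e.reg .rbp).toNat := hloop.slot_rbp
  have k_rbx : v.mem.readLE (e.reg .rsp - 24) 8 = (e.reg .rbx).toNat := hloop.slot_rbx
  have k_ra : UInt64.ofNat (v.mem.readLE (e.reg .rsp) 8) = ret := hloop.slot_ra
  have hsame : Mem.SameExcept
    [⟨(e.reg .rsp).toNat - 112, (e.reg .rsp).toNat⟩,
     ⟨0x800000, 0x1000020⟩] e.mem v.mem := hloop.same
  have hcur := henv.ctx.cursor_range henv.heap.inv.shadow
  have hbase := henv.heap.base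
  have hlimit := henv.heap.limit
  -- gif is live in the heap after `k` rounds
  have hgmem : (F.gif, 120) ∈ liveAt F s k := by
    unfold liveAt Forest.ownedButSaved
    simp only [List.mem_cons, List.mem_append, true_or, or_true]
  have hok := hloop.inv.heap
  have hgin := hloop.owns.inside hok hgmem
  have hglive := hloop.owns.live _ hgmem
  have hbase' : (heapAt H s k).base = 0x800000 := by
    rw [← hbase]
    exact (SameRegion.releaseAll H _).1
  have hlimit' : (heapAt H s k).limit = 0xC00000 := by
    rw [← hlimit]
    exact (SameRegion.releaseAll H _).2
  rw [hbase'] at hgin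
  simp only at hgin hglive
  have hg1 := hgin.1
  have hg2 := hgin.2.2.2.2
  clear hgin
  -- the array is live too
  have hamem : (s.arr, 56 * s.cap) ∈ liveAt F s k := by
    unfold liveAt
    exact List.mem_cons_self
  have hain := hloop.owns.inside hok hamem
  have halive := hloop.owns.live _ hamem
  rw [hbase'] at hain
  simp only at hain halive
  have ha1 := hain.1
  have ha2 := hain.2.2.2.2
  clear hain
  -- `gif.SavedImages`, `gif.ImageCount` and slot `k`, from the shape
  have hsh := hloop.shape.saved
  rw [forestAt_saved, forestAt_gif] at hsh
  obtain ⟨q1, q2, q3, q4, q5⟩ := hsh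
  simp only [gfield] at q1 q2
  simp only [imgsAt_length] at q2 q3
  have hkk : k < (imgsAt s k).length := by
    rw [imgsAt_length]
    exact hk
  have hslot : ImgAt (s.arr + 56 * k) s.imgs[k] v.mem := by
    have := q5 k hkk
    simp only at this
    rw [imgsAt_ge s k k hk (Nat.le_refl _) hkk] at this
    exact this
  clear q5
  have l_saved : v.mem.readLE (e.reg .rdi + 0x48) 8 = s.arr := by
    rw [rd_eq_readLE v.mem _ (F.gif + 72) 8 (by u_omega)]
    exact q1
  have l_count : v.mem.readLE (e.reg .rdi + 0x20) 4 = s.imgs.length := by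
    rw [rd_eq_readLE v.mem _ (F.gif + 32) 4 (by u_omega)]
    exact q2
  have hlen : s.imgs.length < 2 ^ 31 := by omega
  have hsx : Word.ofBV (BitVec.signExtend 64 (BitVec.ofNat 32 s.imgs.length)) = UInt64.ofNat s.imgs.length := by
    rw [sext32_bv _ (by rw [BitVec.toNat_ofNat]; omega), BitVec.toNat_ofNat]
    congr 1
    omega
  have hsw := fs2_slot_word s.arr s.imgs.length
  -- the colour map of slot `k`: its field, its two live objects
  have hcmf := hslot.cm
  rw [hcm] at hcmf
  obtain ⟨m1, m2, m3, m4, m5⟩ : SavedImage.ImageDesc.ColorMap v.mem (s.arr + 56 * k) = m.obj ∧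
      ColorMapObject.ColorCount v.mem m.obj = m.count ∧ ColorMapObject.Colors v.mem m.obj = m.colors ∧
      1 ≤ m.count ∧ m.count ≤ 256 := hcmf
  simp only [gfield] at m1 m3
  have howns := fs2_owns_head hk hloop.owns
  rw [hcm] at howns
  have homem : (m.obj, 24) ∈ (s.arr, 56 * s.cap) :: (Map.objs (some m) ++
      ((rasterObjs s.imgs[k].raster ++ Exts.objs s.imgs[k].ext) ++ fs2_tail F s k)) := by
    simp only [Map.objs, List.mem_cons, List.mem_append, true_or, or_true]
  have hcmem : (m.colors, 3 * m.count) ∈ (s.arr, 56 * s.cap) :: (Map.objs (some m) ++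
      ((rasterObjs s.imgs[k].raster ++ Exts.objs s.imgs[k].ext) ++ fs2_tail F s k)) := by
    simp only [Map.objs, List.mem_cons, List.mem_append, true_or, or_true]
  have holive := howns.live _ homem
  have hclive := howns.live _ hcmem
  have hoin := howns.inside hok homem
  have hcin := howns.inside hok hcmem
  rw [hbase'] at hoin hcin
  simp only at holive hclive hoin hcin
  have hob1 := hoin.1
  have hob2 := hoin.2.2.2.2
  have hcl1 := hcin.1
  have hcl2 := hcin.2.2.2.2
  clear hoin hcin
  have hone : m.colors ≠ m.obj := by
    have hap := howns.apart
    simp only [Map.objs, List.cons_append, List.nil_append, List.pairwise_cons, List.mem_cons] at hap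
    have := hap.2.1 (m.colors, 3 * m.count) (Or.inl rfl)
    exact fun h => this h.symm
  have l_cm : v.mem.readLE (v.reg .rbx + 0x18) 8 = m.obj := by
    rw [rd_eq_readLE v.mem _ (s.arr + 56 * k + 24) 8 (by u_omega)]
    exact m1
  u_walk hcode [hμ.vendor, hsx, hsw] until [fs2_cut2, Gif.L.GifFreeSavedImages.at_107f87] span [ProgX.Base.L.textLo, ProgX.Base.L.textHi] side (v_side)
  case check_107f1c =>
    have hun : ShadowUntouched v.mem s_107f1c.mem := by v_untouched
    exact (hglive.liveIn rest frames (Nat.le_refl _) (Nat.le_refl _)).accSmall hloop.inv.shadow hun _ 8 (by decide) (by u_omega) (by u_omega)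
  case check_107f29 =>
    have hun : ShadowUntouched v.mem s_107f29.mem := by v_untouched
    exact (hglive.liveIn rest frames (Nat.le_refl _) (Nat.le_refl _)).accSmall hloop.inv.shadow hun _ 4 (by decide) (by u_omega) (by u_omega)
  case check_107f4a =>
    -- 0x107f4a (gifalloc.c:439): `sp->ImageDesc.ColorMap` lies inside the live array
    have hun : ShadowUntouched v.mem s_107f4a.mem := by v_untouched
    exact (halive.liveIn rest frames (Nat.le_refl _) (Nat.le_refl _)).accSmall hloop.inv.shadow hun _ 8 (by decide) (by u_omega) (by u_omega)
  case call_inv =>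
    v_inv
  case pre_107f58 =>
    -- 0x107f58 (gifalloc.c:440) `GifFreeMapObject(sp->ImageDesc.ColorMap)`: the heap's invariant over the pushed return address;
    -- the map's two objects are live, its `Colors` field holds the colours
    have hs0 : Mem.SameExcept [⟨(e.reg .rsp).toNat - 32, (e.reg .rsp).toNat - 24⟩] v.mem s_107f58.mem := by
      rw [w_mem]
      u_same
    have e_rsp : (s_107f58.reg .rsp).toNat + 8 = (e.reg .rsp).toNat - 24 := by
      rw [w_rsp]
      u_omega
    have e_rdi : (s_107f58.reg .rdi).toNat = m.obj := by
      rw [w_rdi]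
      exact toNat_ofNat_addr m.obj (by omega)
    refine ⟨⟨?_, hbase', hlimit', henv.heap.text, henv.heap.offText⟩, Or.inr ?_⟩
    · rw [e_rsp, w_mem]
      exact hloop.inv.writeLE_out _ _ _ (by u_omega) (by rw [hbase']; left; u_omega) (by left; u_omega)
    · rw [e_rdi]
      refine ⟨holive, hclive, hone, ?_⟩
      simp only [gfield]
      rw [← m3]
      apply (hs0.eqOn (m.obj + 16) (m.obj + 24) ?_).rd _ 8 (Nat.le_refl _) (Nat.le_refl _) (by omega)
      intro w hw
      have hwe := List.mem_singleton.mp hw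
      rw [hwe]
      simp only
      omega
  -- 0x107f5d (ret6): `GifFreeMapObject` has returned: the heap is the head's with the map's two objects freed
  have e_rdi : (s_107f58.reg .rdi).toNat = m.obj := by
    rw [w_rdi_107f58]
    exact toNat_ofNat_addr m.obj (by omega)
  have hne1 : (s_107f58.reg .rdi).toNat ≠ 0 := by
    rw [e_rdi]
    omega
  have hinv1 := w_post.2 hne1
  clear w_post
  have e8 : (s_107f58.reg .rsp).toNat + 8 = (e.reg .rsp).toNat - 24 := by
    rw [w_rsp_107f58]
    u_omega
  rw [e8, e_rdi, ← releaseAll_map (heapAt H s k) m] at hinv1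
  v_after_call w_rsp_107f58 w_mem_107f58
  simp only [shadowSpan, e_rdi] at w_same
  -- the saved registers and the return address, over the pushed return address and through the callee's footprint
  have hp12 : s_107f58.mem.readLE (e.reg .rsp - 8) 8 = (e.reg .r12).toNat := by
    rw [w_mem_107f58]
    u_frame k_r12
  rw [w_mem_107f58] at hp12
  have hs12 : s_107f58r.mem.readLE (e.reg .rsp - 8) 8 = (e.reg .r12).toNat := by
    clear he_align
    u_frame hp12
  have hpbp : s_107f58.mem.readLE (e.reg .rsp - 16) 8 = (e.reg .rbp).toNat := by
    rw [w_mem_107f58]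
    u_frame k_rbp
  rw [w_mem_107f58] at hpbp
  have hsbp : s_107f58r.mem.readLE (e.reg .rsp - 16) 8 = (e.reg .rbp).toNat := by
    clear he_align
    u_frame hpbp
  have hpbx : s_107f58.mem.readLE (e.reg .rsp - 24) 8 = (e.reg .rbx).toNat := by
    rw [w_mem_107f58]
    u_frame k_rbx
  rw [w_mem_107f58] at hpbx
  have hsbx : s_107f58r.mem.readLE (e.reg .rsp - 24) 8 = (e.reg .rbx).toNat := by
    clear he_align
    u_frame hpbx
  have hpra : UInt64.ofNat (s_107f58.mem.readLE (e.reg .rsp) 8) = ret := by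
    rw [w_mem_107f58]
    u_frame k_ra
  rw [w_mem_107f58] at hpra
  have hsra : UInt64.ofNat (s_107f58r.mem.readLE (e.reg .rsp) 8) = ret := by
    clear he_align
    u_frame hpra
  -- what was written since the head
  have hsr : Mem.SameExcept
    [⟨(e.reg .rsp).toNat - 80, (e.reg .rsp).toNat - 24⟩,
     ⟨m.colors - 24, m.colors - 16⟩,
     ⟨0xC00000 + m.colors / 8, 0xC00000 + (m.colors + 3 * m.count + 7) / 8⟩,
     ⟨m.obj - 24, m.obj - 16⟩,
     ⟨0xC00000 + m.obj / 8, 0xC00000 + (m.obj + 24 + 7) / 8⟩] v.mem s_107f58r.mem := by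
    clear he_align
    u_same
  have hsame1 : Mem.SameExcept
    [⟨(e.reg .rsp).toNat - 112, (e.reg .rsp).toNat⟩,
     ⟨0x800000, 0x1000020⟩] e.mem s_107f58r.mem := by
    clear he_align
    u_same
  -- the array is still live
  have howns1 : Owns ((heapAt H s k).releaseAll ((Map.objs (some m)).map Prod.fst))
      ((s.arr, 56 * s.cap) :: ((rasterObjs s.imgs[k].raster ++ Exts.objs s.imgs[k].ext) ++ fs2_tail F s k)) :=
    fs2_owns_step howns
  have halive1 := howns1.live _ List.mem_cons_self
  simp only at halive1
  u_walk hcode [hμ.vendor] until [fs2_cut2] span [ProgX.Base.L.textLo, ProgX.Base.L.textHi] side (v_side)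
  case check_107f61 =>
    -- 0x107f61 (gifalloc.c:441): the store to `sp->ImageDesc.ColorMap` lies inside the array, still live
    have hun : ShadowUntouched s_107f58r.mem s_107f61.mem := by v_untouched
    exact (halive1.liveIn rest frames (Nat.le_refl _) (Nat.le_refl _)).accSmall hinv1.shadow hun _ 8 (by decide) (by u_omega) (by u_omega)
  -- 107F6EH: since the return of `GifFreeMapObject` a return address and the NULL were stored
  have hs2 : Mem.SameExcept [⟨(e.reg .rsp).toNat - 32, (e.reg .rsp).toNat - 24⟩,
      ⟨s.arr + 56 * k + 24, s.arr + 56 * k + 32⟩] s_107f58r.mem s_107f66.mem := by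
    rw [w_mem]
    u_same
  have hinv2 : HeapInv ((heapAt H s k).releaseAll ((Map.objs (some m)).map Prod.fst)) rest frames
      ((e.reg .rsp).toNat - 24) s_107f66.mem := by
    rw [w_mem]
    have hb1 : ((heapAt H s k).releaseAll ((Map.objs (some m)).map Prod.fst)).base = 0x800000 := by
      rw [← hbase']
      exact (SameRegion.releaseAll _ _).1
    apply HeapInv.writeLE_live _ halive1
    · u_omega
    · u_omega
    · exact hinv1.writeLE_out _ _ _ (by u_omega) (by rw [hb1]; left; u_omega) (by left; u_omega)
  have hf12 : s_107f66.mem.readLE (e.reg .rsp - 8) 8 = (e.reg .r12).toNat := by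
    rw [w_mem]
    u_frame hs12
  have hfbp : s_107f66.mem.readLE (e.reg .rsp - 16) 8 = (e.reg .rbp).toNat := by
    rw [w_mem]
    u_frame hsbp
  have hfbx : s_107f66.mem.readLE (e.reg .rsp - 24) 8 = (e.reg .rbx).toNat := by
    rw [w_mem]
    u_frame hsbx
  have hfra : UInt64.ofNat (s_107f66.mem.readLE (e.reg .rsp) 8) = ret := by
    rw [w_mem]
    u_frame hsra
  have hsame2 : Mem.SameExcept
    [⟨(e.reg .rsp).toNat - 112, (e.reg .rsp).toNat⟩,
     ⟨0x800000, 0x1000020⟩] e.mem s_107f66.mem := by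
    rw [w_mem]
    u_same
  have hcm1 : rd s_107f66.mem (s.arr + 56 * k + 24) 8 = 0 := by
    rw [w_mem, rd_writeLE_same _ _ 8 0 (s.arr + 56 * k + 24) (by u_omega) (by omega)]
  have hcur' : 0x700000 ≤ R.cur ∧ R.cur + 16 ≤ 0x800000 := ⟨hcur.1, hcur.2.1⟩
  obtain ⟨cc, hcc⟩ := hclive
  obtain ⟨co, hco⟩ := holive
  refine ReachVia.done ?_
  exact {
    head := hat0
    lt := hk
    rip := w_rip
    rsp := w_rsp
    rbp := (w_kept.get .rbp rfl).trans c_rbp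
    rbx := by
      rw [w_kept.get .rbx rfl]
      exact hrbx
    r13 := (w_kept.get .r13 rfl).trans hloop.r13
    r14 := (w_kept.get .r14 rfl).trans hloop.r14
    r15 := (w_kept.get .r15 rfl).trans hloop.r15
    slot_r12 := hf12
    slot_rbp := hfbp
    slot_rbx := hfbx
    slot_ra := hfra
    inv := hinv2
    owns := howns1
    wins := by
      refine ⟨_, fs2_same_append hsr hs2, ?_⟩
      intro w hw
      simp only [List.cons_append, List.nil_append, List.mem_cons, List.mem_nil_iff, or_false] at hw
      rcases hw with rfl | rfl | rfl | rfl | rfl | rfl | rfl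
      · left
        exact Loose.stack hok (by simp only; omega) (by simp only; omega) (by simp only; omega)
      · left
        exact Loose.header hok hcur' hcc (by simp only; omega) (by simp only; omega)
      · left
        exact Loose.shadow hok hcur'.2 (by simp only; omega)
      · left
        exact Loose.header hok hcur' hco (by simp only; omega) (by simp only; omega)
      · left
        exact Loose.shadow hok hcur'.2 (by simp only; omega)
      · left
        exact Loose.stack hok (by simp only; omega) (by simp only; omega) (by simp only; omega)
      · right
        exact ⟨Nat.le_refl _, Nat.le_refl _⟩
    cm0 := hcm1
    same := hsame2
    code := ProgX.Base.conv_code_in w_eq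
    abi := by v_inv
  }


/-- Slot `k` at the head: the image `s.imgs[k]`, not done yet. -/
theorem fs2_slot_head {F : Forest} {R : Rd} {s : Saved} {k : Nat} {m0 : Mem} (hshape : Shape (forestAt F s k) R m0)
    (hk : k < s.imgs.length) : ImgAt (s.arr + 56 * k) s.imgs[k] m0 ∧ s.imgs.length ≤ s.cap := by
  have hsh := hshape.saved
  rw [forestAt_saved, forestAt_gif] at hsh
  obtain ⟨q1, q2, q3, q4, q5⟩ := hsh
  simp only [imgsAt_length] at q3
  have hkk : k < (imgsAt s k).length := by
    rw [imgsAt_length]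
    exact hk
  have := q5 k hkk
  simp only at this
  rw [imgsAt_ge s k k hk (Nat.le_refl _) hkk] at this
  exact ⟨this, q3⟩

/-- **WHAT THE WINDOWS WRITTEN BEFORE THE CALL OF `GifFreeExtensions` LEAVE ALONE**: `RasterBits` and the two cells of slot `k`, and
the structural parts of image `k`. -/
theorem fs2_mid_eq {H : Heap} {F : Forest} {R : Rd} {s : Saved} {k : Nat} {m0 m : Mem} {ws : List Span}
    (hshape : Shape (forestAt F s k) R m0) (hplaced : Placed (heapAt H s k) F.owned) (hok : HeapOK (heapAt H s k) m0)
    (hcur : 0x700000 ≤ R.cur ∧ R.cur + 16 ≤ 0x800000) (hs : F.saved = some s) (hk : k < s.imgs.length)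
    (hsame : Mem.SameExcept ws m0 m) (hw : ∀ w, w ∈ ws → fs2_WinOK H F R s k w) :
    Mem.EqOn (s.arr + 56 * k + 32) (s.arr + 56 * k + 56) m0 m ∧
    ∀ o, o ∈ Img.structs s.imgs[k] → Mem.EqOn o.1 (o.1 + o.2) m0 m ∧ o.1 + o.2 < 2 ^ 64 := by
  have hpk := placedAt hplaced hs k
  have G := carry_Geo.intro hshape hpk hok hcur
  obtain ⟨x, hx, hb, hcap⟩ := fs2_arr_obj hplaced hs
  have hle := (fs2_slot_head hshape hk).2
  refine ⟨?_, ?_⟩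
  · apply hsame.eqOn
    intro w hin
    rcases hw w hin with hl | hcm
    · have hoff : carry_Off (forestAt F s k) R True True True True True w := carry_Off.of_loose G hl
      have hmem : (s.arr, 56 * (imgsAt s k).length) ∈ Saved.structs (forestAt F s k).saved := by
        rw [forestAt_saved]
        simp only [Saved.structs, List.mem_cons, true_or]
      have harrw := hoff.savS trivial _ hmem
      rw [imgsAt_length] at harrw
      simp only at harrw
      omega
    · omega
  · intro o ho
    have hom := fs2_struct_mem s k k hk (Nat.le_refl _) ho
    refine ⟨?_, ?_⟩
    · apply hsame.eqOn
      intro w hin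
      have := (fs2_win_miss G hx hb hcap hk hle (Or.inl (hw w hin))).2.2.2.1 o hom
      omega
    · have hos : o ∈ (forestAt F s k).structs := by
        apply carry_mem_structs_saved
        rw [forestAt_saved]
        simp only [Saved.structs, List.mem_cons]
        exact Or.inr hom
      obtain ⟨y, hy, e, hc⟩ := G.structObj o hos
      have := G.inData y hy
      omega



/-- **107F6EH … 107F07H, slot `k` without a raster** (gifalloc.c:444): the checked load of `sp->RasterBits`: NULL. -/
theorem fs2_raster_none (Lay : Layout) (hLay : Lay.hi = 0x1000000) (μ : Microarch) (hμ : UserX.MicroOK μ) (u₀ : State)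
    (hcode : HasCodeNat Lay u₀ Gif.L.GifFreeSavedImages.entry Gif.Code.code_GifFreeSavedImages.nat Gif.L.GifFreeSavedImages.size)
    (h_load8 : Asan.SmallCheck Lay μ ProgX.Base.WayInv (ProgX.Base.CodeOK u₀) [.rax, .rcx, .rdx] 8 ProgX.Base.L.__asan_load8_noabort.entry)
    (H : Heap) (rest : List Obj) (frames : List (Nat × FrameLayout)) (F : Forest) (R : Rd) (s : Saved) (k : Nat) (e : State)
    (ret : Word) (v0 v : State) (hk : k < s.imgs.length) (ps0 : List Nat) (hr : s.imgs[k].raster = none)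
    (hmid : fs2_Mid fs2_cut2 ps0 (rasterObjs s.imgs[k].raster ++ Exts.objs s.imgs[k].ext) H rest frames F R s k u₀ e ret v0 v) :
    ReachVia Lay μ ProgX.Base.WayInv v
      (fs2_Mid fs2_cut3 (ps0 ++ (rasterObjs s.imgs[k].raster).map Prod.fst) (Exts.objs s.imgs[k].ext)
        H rest frames F R s k u₀ e ret v0) := by
  rw [hr] at hmid ⊢
  simp only [rasterObjs, List.nil_append] at hmid
  simp only [rasterObjs, List.map_nil, List.append_nil]
  have hhead := hmid.head
  have hloop0 := hhead.loop
  have he := hloop0.entry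
  v_entry he
  obtain ⟨henv, hrdi, hsv⟩ := hloop0.pre
  have w_rip := hmid.rip
  have c_rsp : v.reg .rsp = e.reg .rsp - 24 := hmid.rsp
  have c_rbp : v.reg .rbp = e.reg .rdi := hmid.rbp
  have hrbx := hmid.rbx
  have w_kept : RegsKept [.rsp] v v := RegsKept.refl _ _
  have w_eq : Mem.EqOn ProgX.Base.L.textLo ProgX.Base.L.textHi u₀.mem v.mem := ProgX.Base.conv_code_eqOn hmid.code
  have hdf := (show abiInv _ from hmid.abi).1
  have hmx := (show abiInv _ from hmid.abi).2
  have hsse := ProgX.Base.sseOK_of_abiInv hmid.abi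
  have k_r12 : v.mem.readLE (e.reg .rsp - 8) 8 = (e.reg .r12).toNat := hmid.slot_r12
  have k_rbp : v.mem.readLE (e.reg .rsp - 16) 8 = (e.reg .rbp).toNat := hmid.slot_rbp
  have k_rbx : v.mem.readLE (e.reg .rsp - 24) 8 = (e.reg .rbx).toNat := hmid.slot_rbx
  have k_ra : UInt64.ofNat (v.mem.readLE (e.reg .rsp) 8) = ret := hmid.slot_ra
  have hsame : Mem.SameExcept
    [⟨(e.reg .rsp).toNat - 112, (e.reg .rsp).toNat⟩,
     ⟨0x800000, 0x1000020⟩] e.mem v.mem := hmid.same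
  have hcur := henv.ctx.cursor_range henv.heap.inv.shadow
  have hcur' : 0x700000 ≤ R.cur ∧ R.cur + 16 ≤ 0x800000 := ⟨hcur.1, hcur.2.1⟩
  have hbase := henv.heap.base
  have hlimit := henv.heap.limit
  have hok0 := hloop0.inv.heap
  have hokC := hmid.inv.heap
  have hbaseK : (heapAt H s k).base = 0x800000 := by
    rw [← hbase]
    exact (SameRegion.releaseAll H _).1
  have hbaseC : ((heapAt H s k).releaseAll ps0).base = 0x800000 := by
    rw [← hbaseK]
    exact (SameRegion.releaseAll _ _).1
  have hlimitC : ((heapAt H s k).releaseAll ps0).limit = 0xC00000 := by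
    rw [← hlimit]
    exact ((SameRegion.releaseAll H _).trans (SameRegion.releaseAll _ _)).2
  -- the array is live
  have hain := hmid.owns.inside hokC List.mem_cons_self
  have halive := hmid.owns.live _ List.mem_cons_self
  rw [hbaseC] at hain
  simp only at hain halive
  have ha1 := hain.1
  have ha2 := hain.2.2.2.2
  clear hain
  -- slot `k` at the head, and what the windows written since left alone
  obtain ⟨hslot0, hle⟩ := fs2_slot_head hloop0.shape hk
  obtain ⟨ws0, hws0, hwin0⟩ := hmid.wins
  obtain ⟨heq0, hst0⟩ := fs2_mid_eq hloop0.shape hloop0.placed hok0 hcur' hloop0.saved hk hws0 hwin0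
  -- `sp->RasterBits` holds NULL
  have hrf := hslot0.raster
  rw [hr] at hrf
  have hr0 : rd v0.mem (s.arr + 56 * k + 32) 8 = 0 := by
    have : SavedImage.RasterBits v0.mem (s.arr + 56 * k) = 0 := hrf
    simp only [gfield] at this
    exact this
  have l_r : v.mem.readLE (v.reg .rbx + 0x20) 8 = 0 := by
    rw [rd_eq_readLE v.mem _ (s.arr + 56 * k + 32) 8 (by u_omega)]
    rw [heq0.rd (s.arr + 56 * k + 32) 8 (by omega) (by omega) (by omega)]
    exact hr0
  u_walk hcode [hμ.vendor] until [fs2_cut3] span [ProgX.Base.L.textLo, ProgX.Base.L.textHi] side (v_side)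
  case check_107f72 =>
    -- 0x107f72 (gifalloc.c:444): `sp->RasterBits` lies inside the live array
    have hun : ShadowUntouched v.mem s_107f72.mem := by v_untouched
    exact (halive.liveIn rest frames (Nat.le_refl _) (Nat.le_refl _)).accSmall hmid.inv.shadow hun _ 8 (by decide) (by u_omega) (by u_omega)
  -- only the return address of the check was stored, below the stack pointer
  have hun : ShadowUntouched v.mem s_107f7e.mem := by v_untouched
  have hs1 : Mem.SameExcept [⟨(e.reg .rsp).toNat - 32, (e.reg .rsp).toNat - 24⟩] v.mem s_107f7e.mem := by
    rw [w_mem]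
    u_same
  have hinv1 : HeapInv ((heapAt H s k).releaseAll ps0) rest frames ((e.reg .rsp).toNat - 24) s_107f7e.mem := by
    apply hmid.inv.sameExcept hun hs1
    intro w hw
    have hwe := List.mem_singleton.mp hw
    rw [hwe, hbaseC]
    left
    left
    show (e.reg .rsp).toNat - 24 ≤ 0x800000
    omega
  have hs12 : s_107f7e.mem.readLE (e.reg .rsp - 8) 8 = (e.reg .r12).toNat := by
    rw [w_mem]
    u_frame k_r12
  have hsbp : s_107f7e.mem.readLE (e.reg .rsp - 16) 8 = (e.reg .rbp).toNat := by
    rw [w_mem]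
    u_frame k_rbp
  have hsbx : s_107f7e.mem.readLE (e.reg .rsp - 24) 8 = (e.reg .rbx).toNat := by
    rw [w_mem]
    u_frame k_rbx
  have hsra : UInt64.ofNat (s_107f7e.mem.readLE (e.reg .rsp) 8) = ret := by
    rw [w_mem]
    u_frame k_ra
  have hsame1 : Mem.SameExcept
    [⟨(e.reg .rsp).toNat - 112, (e.reg .rsp).toNat⟩,
     ⟨0x800000, 0x1000020⟩] e.mem s_107f7e.mem := by
    rw [w_mem]
    u_same
  have hcm1 : rd s_107f7e.mem (s.arr + 56 * k + 24) 8 = 0 := by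
    rw [← hmid.cm0]
    apply (hs1.eqOn (s.arr + 56 * k + 24) (s.arr + 56 * k + 32) ?_).rd _ 8 (Nat.le_refl _) (Nat.le_refl _) (by omega)
    intro w hw
    have hwe := List.mem_singleton.mp hw
    rw [hwe]
    simp only
    omega
  refine ReachVia.done ?_
  exact {
    head := hhead
    lt := hk
    rip := w_rip
    rsp := w_rsp
    rbp := (w_kept.get .rbp rfl).trans c_rbp
    rbx := by
      rw [w_kept.get .rbx rfl]
      exact hrbx
    r13 := (w_kept.get .r13 rfl).trans hmid.r13
    r14 := (w_kept.get .r14 rfl).trans hmid.r14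
    r15 := (w_kept.get .r15 rfl).trans hmid.r15
    slot_r12 := hs12
    slot_rbp := hsbp
    slot_rbx := hsbx
    slot_ra := hsra
    inv := hinv1
    owns := hmid.owns
    wins := by
      refine ⟨_, fs2_same_append hws0 hs1, ?_⟩
      intro w hw
      rcases List.mem_append.mp hw with hin | hin
      · exact hwin0 w hin
      · have hwe := List.mem_singleton.mp hin
        rw [hwe]
        left
        exact Loose.stack hok0 (by simp only; omega) (by simp only; omega) (by simp only; omega)
    cm0 := hcm1
    same := hsame1
    code := ProgX.Base.conv_code_in w_eq
    abi := by v_inv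
  }



/-- **107F6EH … 107F07H, slot `k` with a raster** (gifalloc.c:444-445): the checked load of `sp->RasterBits`, `free(it)`; the field
dangles. -/
theorem fs2_raster_some (Lay : Layout) (hLay : Lay.hi = 0x1000000) (μ : Microarch) (hμ : UserX.MicroOK μ) (u₀ : State)
    (hcode : HasCodeNat Lay u₀ Gif.L.GifFreeSavedImages.entry Gif.Code.code_GifFreeSavedImages.nat Gif.L.GifFreeSavedImages.size)
    (h_load8 : Asan.SmallCheck Lay μ ProgX.Base.WayInv (ProgX.Base.CodeOK u₀) [.rax, .rcx, .rdx] 8 ProgX.Base.L.__asan_load8_noabort.entry)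
    (H : Heap) (rest : List Obj) (frames : List (Nat × FrameLayout)) (F : Forest) (R : Rd) (s : Saved) (k : Nat) (e : State)
    (ret : Word) (v0 v : State) (hk : k < s.imgs.length) (ps0 : List Nat) (r : Nat × Nat) (hr : s.imgs[k].raster = some r)
    (h_fr : Calls Lay μ ProgX.Base.WayInv (ProgX.Base.conv u₀) ProgX.Base.L.free.entry
      (ProgX.Base.Spec.free.spec ((heapAt H s k).releaseAll ps0) rest frames r.2))
    (hmid : fs2_Mid fs2_cut2 ps0 (rasterObjs s.imgs[k].raster ++ Exts.objs s.imgs[k].ext) H rest frames F R s k u₀ e ret v0 v) :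
    ReachVia Lay μ ProgX.Base.WayInv v
      (fs2_Mid fs2_cut3 (ps0 ++ (rasterObjs s.imgs[k].raster).map Prod.fst) (Exts.objs s.imgs[k].ext)
        H rest frames F R s k u₀ e ret v0) := by
  rw [hr] at hmid ⊢
  have hhead := hmid.head
  have hloop0 := hhead.loop
  have he := hloop0.entry
  v_entry he
  obtain ⟨henv, hrdi, hsv⟩ := hloop0.pre
  have w_rip := hmid.rip
  have c_rsp : v.reg .rsp = e.reg .rsp - 24 := hmid.rsp
  have c_rbp : v.reg .rbp = e.reg .rdi := hmid.rbp
  have hrbx := hmid.rbx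
  have w_kept : RegsKept [.rsp] v v := RegsKept.refl _ _
  have w_eq : Mem.EqOn ProgX.Base.L.textLo ProgX.Base.L.textHi u₀.mem v.mem := ProgX.Base.conv_code_eqOn hmid.code
  have hdf := (show abiInv _ from hmid.abi).1
  have hmx := (show abiInv _ from hmid.abi).2
  have hsse := ProgX.Base.sseOK_of_abiInv hmid.abi
  have k_r12 : v.mem.readLE (e.reg .rsp - 8) 8 = (e.reg .r12).toNat := hmid.slot_r12
  have k_rbp : v.mem.readLE (e.reg .rsp - 16) 8 = (e.reg .rbp).toNat := hmid.slot_rbp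
  have k_rbx : v.mem.readLE (e.reg .rsp - 24) 8 = (e.reg .rbx).toNat := hmid.slot_rbx
  have k_ra : UInt64.ofNat (v.mem.readLE (e.reg .rsp) 8) = ret := hmid.slot_ra
  have hsame : Mem.SameExcept
    [⟨(e.reg .rsp).toNat - 112, (e.reg .rsp).toNat⟩,
     ⟨0x800000, 0x1000020⟩] e.mem v.mem := hmid.same
  have hcur := henv.ctx.cursor_range henv.heap.inv.shadow
  have hcur' : 0x700000 ≤ R.cur ∧ R.cur + 16 ≤ 0x800000 := ⟨hcur.1, hcur.2.1⟩
  have hbase := henv.heap.base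
  have hlimit := henv.heap.limit
  have hok0 := hloop0.inv.heap
  have hokC := hmid.inv.heap
  have hbaseK : (heapAt H s k).base = 0x800000 := by
    rw [← hbase]
    exact (SameRegion.releaseAll H _).1
  have hbaseC : ((heapAt H s k).releaseAll ps0).base = 0x800000 := by
    rw [← hbaseK]
    exact (SameRegion.releaseAll _ _).1
  have hlimitC : ((heapAt H s k).releaseAll ps0).limit = 0xC00000 := by
    rw [← hlimit]
    exact ((SameRegion.releaseAll H _).trans (SameRegion.releaseAll _ _)).2
  -- the array is live
  have hain := hmid.owns.inside hokC List.mem_cons_self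
  have halive := hmid.owns.live _ List.mem_cons_self
  rw [hbaseC] at hain
  simp only at hain halive
  have ha1 := hain.1
  have ha2 := hain.2.2.2.2
  clear hain
  -- slot `k` at the head, and what the windows written since left alone
  obtain ⟨hslot0, hle⟩ := fs2_slot_head hloop0.shape hk
  obtain ⟨ws0, hws0, hwin0⟩ := hmid.wins
  obtain ⟨heq0, hst0⟩ := fs2_mid_eq hloop0.shape hloop0.placed hok0 hcur' hloop0.saved hk hws0 hwin0
  -- `sp->RasterBits` holds the raster, a live object
  have hrf := hslot0.raster
  rw [hr] at hrf
  have hr0 : rd v0.mem (s.arr + 56 * k + 32) 8 = r.1 := by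
    have : SavedImage.RasterBits v0.mem (s.arr + 56 * k) = r.1 := hrf.1
    simp only [gfield] at this
    exact this
  have hrmem : r ∈ (s.arr, 56 * s.cap) :: ((rasterObjs (some r) ++ Exts.objs s.imgs[k].ext) ++ fs2_tail F s k) := by
    simp only [rasterObjs, List.mem_cons, List.mem_append, List.mem_nil_iff, or_false, true_or, or_true]
  have hrlive := hmid.owns.live r hrmem
  have hrin := hmid.owns.inside hokC hrmem
  rw [hbaseC] at hrin
  have hrr1 := hrin.1
  have hrr2 := hrin.2.2.2.2
  clear hrin
  -- it was live at the head too
  have hrliveK : (heapAt H s k).Live r.1 r.2 := by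
    have h0 := fs2_owns_head hk hloop0.owns
    rw [hr] at h0
    apply h0.live r
    simp only [rasterObjs, List.mem_cons, List.mem_append, List.mem_nil_iff, or_false, true_or, or_true]
  have l_r : v.mem.readLE (v.reg .rbx + 0x20) 8 = r.1 := by
    rw [rd_eq_readLE v.mem _ (s.arr + 56 * k + 32) 8 (by u_omega)]
    rw [heq0.rd (s.arr + 56 * k + 32) 8 (by omega) (by omega) (by omega)]
    exact hr0
  u_walk hcode [hμ.vendor] until [fs2_cut3] span [ProgX.Base.L.textLo, ProgX.Base.L.textHi] side (v_side)
  case check_107f72 =>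
    -- 0x107f72 (gifalloc.c:444): `sp->RasterBits` lies inside the live array
    have hun : ShadowUntouched v.mem s_107f72.mem := by v_untouched
    exact (halive.liveIn rest frames (Nat.le_refl _) (Nat.le_refl _)).accSmall hmid.inv.shadow hun _ 8 (by decide) (by u_omega) (by u_omega)
  case call_inv =>
    v_inv
  case pre_107f80 =>
    -- 0x107f80 (gifalloc.c:445) `free(sp->RasterBits)`: the heap's invariant over the pushed return address; the raster is live
    have e_rsp : (s_107f80.reg .rsp).toNat + 8 = (e.reg .rsp).toNat - 24 := by
      rw [w_rsp]
      u_omega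
    have e_rdi : (s_107f80.reg .rdi).toNat = r.1 := by
      rw [w_rdi]
      exact toNat_ofNat_addr r.1 (by omega)
    refine ⟨⟨?_, hbaseC, hlimitC, henv.heap.text, henv.heap.offText⟩, Or.inr ?_⟩
    · rw [e_rsp, w_mem]
      exact hmid.inv.writeLE_out _ _ _ (by u_omega) (by rw [hbaseC]; left; u_omega) (by left; u_omega)
    · rw [e_rdi]
      exact hrlive
  -- 0x107f85 (ret9): `free` has returned: the raster is freed
  have e_rdi : (s_107f80.reg .rdi).toNat = r.1 := by
    rw [w_rdi_107f80]
    exact toNat_ofNat_addr r.1 (by omega)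
  have hne1 : (s_107f80.reg .rdi).toNat ≠ 0 := by
    rw [e_rdi]
    omega
  have hinv1 := w_post.2 hne1
  clear w_post
  have e8 : (s_107f80.reg .rsp).toNat + 8 = (e.reg .rsp).toNat - 24 := by
    rw [w_rsp_107f80]
    u_omega
  have hheap : ((heapAt H s k).releaseAll ps0).release r.1 =
      (heapAt H s k).releaseAll (ps0 ++ (rasterObjs (some r)).map Prod.fst) := by
    rw [GifFreeExtensions.releaseAll_append]
    rfl
  rw [e8, e_rdi, hheap] at hinv1
  v_after_call w_rsp_107f80 w_mem_107f80
  simp only [shadowSpan, e_rdi] at w_same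
  -- the saved registers and the return address, over the pushed return address and through the callee's footprint
  have hp12 : s_107f80.mem.readLE (e.reg .rsp - 8) 8 = (e.reg .r12).toNat := by
    rw [w_mem_107f80]
    u_frame k_r12
  rw [w_mem_107f80] at hp12
  have hs12 : s_107f80r.mem.readLE (e.reg .rsp - 8) 8 = (e.reg .r12).toNat := by
    clear he_align
    u_frame hp12
  have hpbp : s_107f80.mem.readLE (e.reg .rsp - 16) 8 = (e.reg .rbp).toNat := by
    rw [w_mem_107f80]
    u_frame k_rbp
  rw [w_mem_107f80] at hpbp
  have hsbp : s_107f80r.mem.readLE (e.reg .rsp - 16) 8 = (e.reg .rbp).toNat := by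
    clear he_align
    u_frame hpbp
  have hpbx : s_107f80.mem.readLE (e.reg .rsp - 24) 8 = (e.reg .rbx).toNat := by
    rw [w_mem_107f80]
    u_frame k_rbx
  rw [w_mem_107f80] at hpbx
  have hsbx : s_107f80r.mem.readLE (e.reg .rsp - 24) 8 = (e.reg .rbx).toNat := by
    clear he_align
    u_frame hpbx
  have hpra : UInt64.ofNat (s_107f80.mem.readLE (e.reg .rsp) 8) = ret := by
    rw [w_mem_107f80]
    u_frame k_ra
  rw [w_mem_107f80] at hpra
  have hsra : UInt64.ofNat (s_107f80r.mem.readLE (e.reg .rsp) 8) = ret := by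
    clear he_align
    u_frame hpra
  -- what was written since 107F6EH
  have hsr : Mem.SameExcept
    [⟨(e.reg .rsp).toNat - 56, (e.reg .rsp).toNat - 24⟩,
     ⟨r.1 - 24, r.1 - 16⟩,
     ⟨0xC00000 + r.1 / 8, 0xC00000 + (r.1 + r.2 + 7) / 8⟩] v.mem s_107f80r.mem := by
    clear he_align
    u_same
  have hsame1 : Mem.SameExcept
    [⟨(e.reg .rsp).toNat - 112, (e.reg .rsp).toNat⟩,
     ⟨0x800000, 0x1000020⟩] e.mem s_107f80r.mem := by
    clear he_align
    u_same
  -- the colour-map field still holds NULL: the raster is another object than the array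
  have hane : ((s.arr, 56 * s.cap) : Nat × Nat) ≠ r := by
    have hap := (List.pairwise_cons.mp hmid.owns.apart).1 r (by
      simp only [rasterObjs, List.mem_cons, List.mem_append, List.mem_nil_iff, or_false, true_or])
    intro heq
    rw [← heq] at hap
    exact hap rfl
  have hfar := hmid.owns.far hokC List.mem_cons_self hrmem hane
  simp only at hfar
  have hscm : rd s_107f80r.mem (s.arr + 56 * k + 24) 8 = 0 := by
    rw [← hmid.cm0]
    apply (hsr.eqOn (s.arr + 56 * k + 24) (s.arr + 56 * k + 32) ?_).rd _ 8 (Nat.le_refl _) (Nat.le_refl _) (by omega)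
    intro w hw
    simp only [List.mem_cons, List.mem_nil_iff, or_false] at hw
    rcases hw with rfl | rfl | rfl
    · simp only
      omega
    · simp only
      omega
    · simp only
      omega
  have howns0 := hmid.owns
  simp only [List.append_assoc] at howns0
  have howns1 := fs2_owns_step howns0
  rw [← GifFreeExtensions.releaseAll_append] at howns1
  u_walk hcode [hμ.vendor] until [fs2_cut3] span [ProgX.Base.L.textLo, ProgX.Base.L.textHi] side (v_side)
  obtain ⟨cr, hcr⟩ := hrliveK
  refine ReachVia.done ?_
  exact {
    head := hhead
    lt := hk
    rip := w_rip
    rsp := w_rsp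
    rbp := (w_kept.get .rbp rfl).trans c_rbp
    rbx := by
      rw [w_kept.get .rbx rfl]
      exact hrbx
    r13 := (w_kept.get .r13 rfl).trans hmid.r13
    r14 := (w_kept.get .r14 rfl).trans hmid.r14
    r15 := (w_kept.get .r15 rfl).trans hmid.r15
    slot_r12 := by
      rw [w_mem]
      exact hs12
    slot_rbp := by
      rw [w_mem]
      exact hsbp
    slot_rbx := by
      rw [w_mem]
      exact hsbx
    slot_ra := by
      rw [w_mem]
      exact hsra
    inv := by
      rw [w_mem]
      exact hinv1
    owns := howns1
    wins := by
      rw [w_mem]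
      refine ⟨_, fs2_same_append hws0 hsr, ?_⟩
      intro w hw
      rcases List.mem_append.mp hw with hin | hin
      · exact hwin0 w hin
      · simp only [List.mem_cons, List.mem_nil_iff, or_false] at hin
        rcases hin with rfl | rfl | rfl
        · left
          exact Loose.stack hok0 (by simp only; omega) (by simp only; omega) (by simp only; omega)
        · left
          exact Loose.header hok0 hcur' hcr (by simp only; omega) (by simp only; omega)
        · left
          exact Loose.shadow hok0 hcur'.2 (by simp only; omega)
    cm0 := by
      rw [w_mem]
      exact hscm
    same := by
      rw [w_mem]
      exact hsame1
    code := ProgX.Base.conv_code_in w_eq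
    abi := by v_inv
  }



/-- **The two cells of slot `k` hold its extension list** in a memory that agrees with the head's on the cells and on the list's
counted blocks. -/
theorem fs2_ext_cells {slot : Nat} {g : Img} {m0 m : Mem} (h : ImgAt slot g m0)
    (heq : Mem.EqOn (slot + 32) (slot + 56) m0 m)
    (hst : ∀ o, o ∈ Img.structs g → Mem.EqOn o.1 (o.1 + o.2) m0 m ∧ o.1 + o.2 < 2 ^ 64) (hlt : slot + 56 < 2 ^ 64) :
    ExtsAt g.ext (rd m (slot + 48) 8) (rd m (slot + 40) 4) m := by
  have hx := h.ext
  simp only [gfield] at hx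
  rw [heq.rd (slot + 48) 8 (by omega) (by omega) (by omega), heq.rd (slot + 40) 4 (by omega) (by omega) (by omega)]
  apply hx.frame
  · intro o ho
    exact (hst o (List.mem_append_right _ ho)).1
  · intro x hx'
    have hmem : (x.arr, 24 * x.blocks.length) ∈ Img.structs g := by
      unfold Img.structs
      rw [hx']
      simp only [Exts.structs, List.mem_append, List.mem_singleton, or_true]
    exact (hst _ hmem).2

/-- **107F07H … 107F18H** (gifalloc.c:448, 438 `sp++`): `GifFreeExtensions(&sp->ExtensionBlockCount, &sp->ExtensionBlocks)`: the
head, one round later. -/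
theorem fs2_latch (Lay : Layout) (hLay : Lay.hi = 0x1000000) (μ : Microarch) (hμ : UserX.MicroOK μ) (u₀ : State)
    (hcode : HasCodeNat Lay u₀ Gif.L.GifFreeSavedImages.entry Gif.Code.code_GifFreeSavedImages.nat Gif.L.GifFreeSavedImages.size)
    (H : Heap) (rest : List Obj) (frames : List (Nat × FrameLayout)) (F : Forest) (R : Rd) (s : Saved) (k : Nat) (e : State)
    (ret : Word) (v0 v : State) (hk : k < s.imgs.length) (ps0 : List Nat)
    (hps : (heapAt H s k).releaseAll (ps0 ++ (Exts.objs s.imgs[k].ext).map Prod.fst) = heapAt H s (k + 1))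
    (h_fe : Calls Lay μ ProgX.Base.WayInv (ProgX.Base.conv u₀) Gif.L.GifFreeExtensions.entry
      (Gif.Spec.GifFreeExtensions.spec ((heapAt H s k).releaseAll ps0) rest frames s.imgs[k].ext s.arr (56 * s.cap)))
    (hmid : fs2_Mid fs2_cut3 ps0 (Exts.objs s.imgs[k].ext) H rest frames F R s k u₀ e ret v0 v) :
    ReachVia Lay μ ProgX.Base.WayInv v (Head H rest frames F R s (k + 1) u₀ e ret) := by
  have hhead := hmid.head
  have hloop0 := hhead.loop
  have he := hloop0.entry
  v_entry he
  obtain ⟨henv, hrdi, hsv⟩ := hloop0.pre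
  have w_rip := hmid.rip
  have c_rsp : v.reg .rsp = e.reg .rsp - 24 := hmid.rsp
  have c_rbp : v.reg .rbp = e.reg .rdi := hmid.rbp
  have hrbx := hmid.rbx
  have w_kept : RegsKept [.rsp] v v := RegsKept.refl _ _
  have w_eq : Mem.EqOn ProgX.Base.L.textLo ProgX.Base.L.textHi u₀.mem v.mem := ProgX.Base.conv_code_eqOn hmid.code
  have hdf := (show abiInv _ from hmid.abi).1
  have hmx := (show abiInv _ from hmid.abi).2
  have hsse := ProgX.Base.sseOK_of_abiInv hmid.abi
  have k_r12 : v.mem.readLE (e.reg .rsp - 8) 8 = (e.reg .r12).toNat := hmid.slot_r12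
  have k_rbp : v.mem.readLE (e.reg .rsp - 16) 8 = (e.reg .rbp).toNat := hmid.slot_rbp
  have k_rbx : v.mem.readLE (e.reg .rsp - 24) 8 = (e.reg .rbx).toNat := hmid.slot_rbx
  have k_ra : UInt64.ofNat (v.mem.readLE (e.reg .rsp) 8) = ret := hmid.slot_ra
  have hsame : Mem.SameExcept
    [⟨(e.reg .rsp).toNat - 112, (e.reg .rsp).toNat⟩,
     ⟨0x800000, 0x1000020⟩] e.mem v.mem := hmid.same
  have hcur := henv.ctx.cursor_range henv.heap.inv.shadow
  have hcur' : 0x700000 ≤ R.cur ∧ R.cur + 16 ≤ 0x800000 := ⟨hcur.1, hcur.2.1⟩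
  have hbase := henv.heap.base
  have hlimit := henv.heap.limit
  have hok0 := hloop0.inv.heap
  have hokC := hmid.inv.heap
  have hbaseK : (heapAt H s k).base = 0x800000 := by
    rw [← hbase]
    exact (SameRegion.releaseAll H _).1
  have hbaseC : ((heapAt H s k).releaseAll ps0).base = 0x800000 := by
    rw [← hbaseK]
    exact (SameRegion.releaseAll _ _).1
  have hlimitC : ((heapAt H s k).releaseAll ps0).limit = 0xC00000 := by
    rw [← hlimit]
    exact ((SameRegion.releaseAll H _).trans (SameRegion.releaseAll _ _)).2
  -- the array is live
  have hain := hmid.owns.inside hokC List.mem_cons_self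
  have halive := hmid.owns.live _ List.mem_cons_self
  rw [hbaseC] at hain
  simp only at hain halive
  have ha1 := hain.1
  have ha2 := hain.2.2.2.2
  clear hain
  -- slot `k` at the head, and what the windows written since left alone
  obtain ⟨hslot0, hle⟩ := fs2_slot_head hloop0.shape hk
  obtain ⟨ws0, hws0, hwin0⟩ := hmid.wins
  obtain ⟨heq0, hst0⟩ := fs2_mid_eq hloop0.shape hloop0.placed hok0 hcur' hloop0.saved hk hws0 hwin0
  u_walk hcode [hμ.vendor] until [Gif.L.GifFreeSavedImages.at_107f18] span [ProgX.Base.L.textLo, ProgX.Base.L.textHi] side (v_side)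
  case call_inv =>
    v_inv
  case pre_107f0f =>
    -- 0x107f0f (gifalloc.c:448): the heap's invariant over the pushed return address; the pair of cells of slot `k` lies in the
    -- live array and holds the image's extension list
    have hs0 : Mem.SameExcept [⟨(e.reg .rsp).toNat - 32, (e.reg .rsp).toNat - 24⟩] v.mem s_107f0f.mem := by
      rw [w_mem]
      u_same
    have hwin1 : ∀ w, w ∈ ws0 ++ [⟨(e.reg .rsp).toNat - 32, (e.reg .rsp).toNat - 24⟩] → fs2_WinOK H F R s k w := by
      intro w hw
      rcases List.mem_append.mp hw with hin | hin
      · exact hwin0 w hin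
      · have hwe := List.mem_singleton.mp hin
        rw [hwe]
        left
        exact Loose.stack hok0 (by simp only; omega) (by simp only; omega) (by simp only; omega)
    obtain ⟨heq1, hst1⟩ := fs2_mid_eq hloop0.shape hloop0.placed hok0 hcur' hloop0.saved hk (fs2_same_append hws0 hs0) hwin1
    have e_rsp : (s_107f0f.reg .rsp).toNat + 8 = (e.reg .rsp).toNat - 24 := by
      rw [w_rsp]
      u_omega
    have e_rdi : (s_107f0f.reg .rdi).toNat = s.arr + 56 * k + 40 := by
      rw [w_rdi]
      u_omega
    have e_rsi : (s_107f0f.reg .rsi).toNat = s.arr + 56 * k + 48 := by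
      rw [w_rsi]
      u_omega
    refine ⟨⟨?_, hbaseC, hlimitC, henv.heap.text, henv.heap.offText⟩, ?_⟩
    · rw [e_rsp, w_mem]
      exact hmid.inv.writeLE_out _ _ _ (by u_omega) (by rw [hbaseC]; left; u_omega) (by left; u_omega)
    · rw [e_rdi, e_rsi]
      exact {
        holder := halive
        cpIn := by omega
        bpIn := by omega
        apartCells := by omega
        shape := fs2_ext_cells hslot0 heq1 hst1 (by omega)
        owns := hmid.owns.sublist (List.Sublist.cons_cons _ (List.sublist_append_left _ _))
      }
  -- 0x107f14 (ret2): `GifFreeExtensions` has returned: the list's objects are freed, the two cells hold `(0, 0)`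
  have e_rdi : (s_107f0f.reg .rdi).toNat = s.arr + 56 * k + 40 := by
    rw [w_rdi_107f0f]
    u_omega
  have e_rsi : (s_107f0f.reg .rsi).toNat = s.arr + 56 * k + 48 := by
    rw [w_rsi_107f0f]
    u_omega
  have e8 : (s_107f0f.reg .rsp).toNat + 8 = (e.reg .rsp).toNat - 24 := by
    rw [w_rsp_107f0f]
    u_omega
  have e0 : (s_107f0f.reg .rsp).toNat = (e.reg .rsp).toNat - 32 := by
    rw [w_rsp_107f0f]
    u_omega
  obtain ⟨hinvR, hbp0, hcp0, wsE, hwsE, hwinE⟩ := w_post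
  rw [e_rsi] at hbp0
  rw [e_rdi] at hcp0
  rw [e8, ← GifFreeExtensions.releaseAll_append, hps] at hinvR
  rw [e_rdi, e_rsi, e0] at hwinE
  have hs0 : Mem.SameExcept [⟨(e.reg .rsp).toNat - 32, (e.reg .rsp).toNat - 24⟩] v.mem s_107f0f.mem := by
    rw [w_mem_107f0f]
    u_same
  v_after_call w_rsp_107f0f w_mem_107f0f
  -- the saved registers and the return address, over the pushed return address and through the callee's footprint
  have hp12 : s_107f0f.mem.readLE (e.reg .rsp - 8) 8 = (e.reg .r12).toNat := by
    rw [w_mem_107f0f]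
    u_frame k_r12
  rw [w_mem_107f0f] at hp12
  have hs12 : s_107f0fr.mem.readLE (e.reg .rsp - 8) 8 = (e.reg .r12).toNat := by
    clear he_align
    u_frame hp12
  have hpbp : s_107f0f.mem.readLE (e.reg .rsp - 16) 8 = (e.reg .rbp).toNat := by
    rw [w_mem_107f0f]
    u_frame k_rbp
  rw [w_mem_107f0f] at hpbp
  have hsbp : s_107f0fr.mem.readLE (e.reg .rsp - 16) 8 = (e.reg .rbp).toNat := by
    clear he_align
    u_frame hpbp
  have hpbx : s_107f0f.mem.readLE (e.reg .rsp - 24) 8 = (e.reg .rbx).toNat := by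
    rw [w_mem_107f0f]
    u_frame k_rbx
  rw [w_mem_107f0f] at hpbx
  have hsbx : s_107f0fr.mem.readLE (e.reg .rsp - 24) 8 = (e.reg .rbx).toNat := by
    clear he_align
    u_frame hpbx
  have hpra : UInt64.ofNat (s_107f0f.mem.readLE (e.reg .rsp) 8) = ret := by
    rw [w_mem_107f0f]
    u_frame k_ra
  rw [w_mem_107f0f] at hpra
  have hsra : UInt64.ofNat (s_107f0fr.mem.readLE (e.reg .rsp) 8) = ret := by
    clear he_align
    u_frame hpra
  have hsame1 : Mem.SameExcept
    [⟨(e.reg .rsp).toNat - 112, (e.reg .rsp).toNat⟩,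
     ⟨0x800000, 0x1000020⟩] e.mem s_107f0fr.mem := by
    clear he_align
    u_same
  -- the array is an object of the heap at the call: the gap windows miss it
  obtain ⟨ca, hca⟩ := halive
  have hcap := hokC.size_le_cap hca
  simp only at hcap
  -- every window written in this round
  have hwinAll : ∀ w, w ∈ (ws0 ++ [⟨(e.reg .rsp).toNat - 32, (e.reg .rsp).toNat - 24⟩]) ++ wsE → fs2_WinOK2 H F R s k w := by
    intro w hw
    rcases List.mem_append.mp hw with hin | hin
    · left
      rcases List.mem_append.mp hin with hin' | hin'
      · exact hwin0 w hin'
      · have hwe := List.mem_singleton.mp hin'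
        rw [hwe]
        left
        exact Loose.stack hok0 (by simp only; omega) (by simp only; omega) (by simp only; omega)
    · rcases hwinE w hin with hc | hc | ⟨hgap, hwhere⟩
      · right
        omega
      · right
        omega
      · left
        left
        left
        have hgapK : Gap0 (heapAt H s k) w := (GifFreeExtensions.gap0_releaseAll _ _ _).mp hgap
        refine ⟨hgapK, ?_, ?_⟩
        · omega
        · omega
  have hsAll := fs2_same_append (fs2_same_append hws0 hs0) hwsE
  -- the colour-map field still holds NULL
  have hcmR : rd s_107f0fr.mem (s.arr + 56 * k + 24) 8 = 0 := by
    rw [← hmid.cm0]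
    apply ((fs2_same_append hs0 hwsE).eqOn (s.arr + 56 * k + 24) (s.arr + 56 * k + 32) ?_).rd _ 8 (Nat.le_refl _)
      (Nat.le_refl _) (by omega)
    intro w hw
    rcases List.mem_append.mp hw with hin | hin
    · have hwe := List.mem_singleton.mp hin
      rw [hwe]
      simp only
      omega
    · rcases hwinE w hin with hc | hc | ⟨hgap, hwhere⟩
      · omega
      · omega
      · have := hgap _ hca
        simp only at this
        omega
  have hshapeR := fs2_round_shape hloop0.shape hloop0.placed hok0 hcur' hloop0.saved hk hsAll hwinAll hcmR hbp0 hcp0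
  have hplacedR : Placed (heapAt H s (k + 1)) F.owned := by
    rw [← hps]
    exact GifFreeExtensions.placed_releaseAll hloop0.placed _
  have hownsR : Owns (heapAt H s (k + 1)) (liveAt F s (k + 1)) := by
    have h0 := fs2_owns_step hmid.owns
    rw [← GifFreeExtensions.releaseAll_append, hps] at h0
    exact h0
  have hremR : rem R s_107f0fr.mem = rem R e.mem := by
    apply rem_sameExcept hsame1 (by omega)
    intro w hw
    simp only [List.mem_cons, List.mem_nil_iff, or_false] at hw
    rcases hw with rfl | rfl
    · simp only
      omega
    · simp only
      omega
  u_walk hcode [hμ.vendor] until [Gif.L.GifFreeSavedImages.at_107f18] span [ProgX.Base.L.textLo, ProgX.Base.L.textHi] side (v_side)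
  refine ReachVia.done ⟨?_, ?_⟩
  · exact {
      entry := hloop0.entry
      pre := hloop0.pre
      saved := hloop0.saved
      le := hk
      rip := w_rip
      rsp := w_rsp
      rbp := (w_kept.get .rbp rfl).trans c_rbp
      r13 := (w_kept.get .r13 rfl).trans hmid.r13
      r14 := (w_kept.get .r14 rfl).trans hmid.r14
      r15 := (w_kept.get .r15 rfl).trans hmid.r15
      slot_r12 := by
        rw [w_mem]
        exact hs12
      slot_rbp := by
        rw [w_mem]
        exact hsbp
      slot_rbx := by
        rw [w_mem]
        exact hsbx
      slot_ra := by
        rw [w_mem]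
        exact hsra
      inv := by
        rw [w_mem]
        exact hinvR
      owns := hownsR
      placed := hplacedR
      shape := by
        rw [w_mem]
        exact hshapeR
      rem := by
        rw [w_mem]
        exact hremR
      same := by
        rw [w_mem]
        exact hsame1
      code := ProgX.Base.conv_code_in w_eq
      abi := by v_inv
    }
  · rw [w_rbx]
    u_omega


/-- **The heap after the three `free` steps of round `k`** (the colour map, the raster, the extension list) **is the heap after
`k + 1` rounds** (`heapAt_succ`, `heapAt_round`). -/
theorem fs2_heap_round (H : Heap) (s : Saved) (k : Nat) (hk : k < s.imgs.length) :
    (heapAt H s k).releaseAll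
        (((Map.objs s.imgs[k].cm).map Prod.fst ++ (rasterObjs s.imgs[k].raster).map Prod.fst) ++
          (Exts.objs s.imgs[k].ext).map Prod.fst) =
      heapAt H s (k + 1) := by
  rw [heapAt_succ H s k hk, heapAt_round, GifFreeExtensions.releaseAll_append, GifFreeExtensions.releaseAll_append]

end Gif.Spec.GifFreeSavedImages_2
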